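-- pv_equiv track=rewrite | github.com/bitsofbits/advent_of_code | 2020/day_21/pythonimp/implementation.py | without_allergans
-- ===== SOURCE A (Python) =====
-- def match_allergans(items):
--     possible_foods = {}
--     for ingredients, allergens in items:
--         for k in allergens:
--             if k not in possible_foods:
--                 possible_foods[k] = set(ingredients)
--             else:
--                 possible_foods[k] &= set(ingredients)
--     return full_match(possible_foods)
--
-- def update_known(alergen_to_food, known):
--     changed = False
--     for allergen, foods in alergen_to_food.items():
--         if len(foods) == 1:
--             [f] = foods
--             known[allergen] = f
--             changed = True
--     for allergen in known:
--         if allergen in alergen_to_food: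
--             changed = True
--             alergen_to_food.pop(allergen)
--     known_foods = set(known.values())
--     for foods in alergen_to_food.values():
--         overlap = known_foods & foods
--         for x in overlap:
--             changed = True
--             foods.remove(x)
--     return changed
--
-- def full_match(possible_foods):
--     known = {}
--     while update_known(possible_foods, known):
--         pass
--     return known
--
-- def without_allergans(items):
--     allergen_to_food = match_allergans(items)
--     avoid = set(allergen_to_food.values())
--     clean = set()
--     for ingredients, _ in items:
--         for k in ingredients:
--             if k not in avoid:
--                 clean.add(k)
--     return clean
-- ===== SOURCE B (Python) =====
-- def without_allergans(items):
--     # Group the ingredient lists per allergen, intersect each group once, then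
--     # resolve by Kahn-style worklist propagation over an inverted
--     # food->allergens index with remaining-candidate counters (no full rescans).
--     by_allergen = {}
--     for ingredients, allergens in items:
--         foods = set(ingredients)
--         for a in dict.fromkeys(allergens):
--             by_allergen.setdefault(a, []).append(foods)
--     cand = {a: set.intersection(*sets) for a, sets in by_allergen.items()}
--     containing = {}
--     for a, s in cand.items():
--         for f in s:
--             containing.setdefault(f, []).append(a)
--     count = {a: len(s) for a, s in cand.items()}
--     queue = [a for a, s in cand.items() if len(s) == 1]
--     done = set()
--     resolved = set()
--     i = 0
--     while i < len(queue):
--         a = queue[i]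
--         i += 1
--         if a in done:
--             continue
--         rem = [x for x in cand[a] if x not in resolved]
--         if len(rem) != 1:
--             continue
--         done.add(a)
--         resolved.add(rem[0])
--         for b in containing.get(rem[0], []):
--             if b not in done:
--                 count[b] -= 1
--                 if count[b] == 1:
--                     queue.append(b)
--     return {f for ingredients, _ in items for f in ingredients if f not in resolved}
-- ===== Notes on version B (the rewrite author's own statement) =====
-- stated objective: alternative
-- what changed: A's repeated full-table fixpoint rounds (rescan all allergen sets, collect singletons, pop them, purge known foods in place) are replaced by grouping the ingredient sets per allergen with one intersection each, then Kahn-style worklist propagation over an inverted food-to-allergens index with remaining-candidate counters.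
import Mathlib
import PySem

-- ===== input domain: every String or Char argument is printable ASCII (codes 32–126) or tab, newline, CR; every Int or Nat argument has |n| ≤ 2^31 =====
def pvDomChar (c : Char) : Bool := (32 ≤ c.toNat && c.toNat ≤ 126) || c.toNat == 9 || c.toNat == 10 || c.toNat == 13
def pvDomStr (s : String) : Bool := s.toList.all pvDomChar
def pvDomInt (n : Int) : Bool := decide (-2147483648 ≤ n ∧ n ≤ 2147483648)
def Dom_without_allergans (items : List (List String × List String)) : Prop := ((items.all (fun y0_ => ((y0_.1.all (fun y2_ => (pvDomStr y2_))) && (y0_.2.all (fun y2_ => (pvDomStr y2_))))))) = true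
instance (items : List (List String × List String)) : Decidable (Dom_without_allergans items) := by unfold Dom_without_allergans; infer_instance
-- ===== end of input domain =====

-- B replaces A's repeated full-table fixpoint rounds by grouped one-shot intersections per
-- allergen plus Kahn-style worklist propagation over an inverted food->allergens index with
-- counters (an alternative algorithm; same return value, proved below).

-- ===== PORT A =====
-- match_allergans: intersect ingredient sets per allergen, in line order
def matchA (items : List (List String × List String)) : PySem.Dict String (PySem.Set String) :=
  items.foldl (fun pf pr =>
    pr.2.foldl (fun pf k =>
      if !pf.contains k then pf.insert k (PySem.Set.ofList pr.1)
      else pf.modify k PySem.Set.empty (fun s => PySem.Set.inter s (PySem.Set.ofList pr.1)))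
      pf) PySem.Dict.empty

-- update_known: three phases (collect singletons into known, pop known allergens, remove known foods)
def updateA (d : PySem.Dict String (PySem.Set String)) (known : PySem.Dict String String) :
    PySem.Dict String (PySem.Set String) × PySem.Dict String String × Bool :=
  let p1 := d.items.foldl
    (fun (acc : PySem.Dict String String × Bool) kv =>
      if kv.2.length == 1 then (acc.1.insert kv.1 (kv.2.headD ""), true) else acc)
    (known, false)
  let p2 := p1.1.keys.foldl
    (fun (acc : PySem.Dict String (PySem.Set String) × Bool) a =>
      if acc.1.contains a then (acc.1.erase a, true) else acc)
    (d, p1.2)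
  let knownFoods := PySem.Set.ofList p1.1.values
  let p3 := p2.1.items.foldl
    (fun (acc : PySem.Dict String (PySem.Set String) × Bool) kv =>
      (PySem.Set.inter knownFoods kv.2).foldl
        (fun (acc2 : PySem.Dict String (PySem.Set String) × Bool) x =>
          (acc2.1.modify kv.1 PySem.Set.empty (fun s => PySem.Set.discard s x), true))
        acc)
    (p2.1, p2.2)
  (p3.1, p1.1, p3.2)

-- full_match's `while update_known(...)` loop; the fuel is an upper bound on the rounds
-- (each changing round pops at least one allergen), the loop logic is update_known's verbatim
def loopA (fuel : Nat) (d : PySem.Dict String (PySem.Set String))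
    (known : PySem.Dict String String) : PySem.Dict String String :=
  match fuel with
  | 0 => known
  | Nat.succ f =>
    let r := updateA d known
    if r.2.2 then loopA f r.1 r.2.1 else r.2.1

def without_allergans (items : List (List String × List String)) : List String :=
  let atf := (fun pf => loopA (pf.items.length + 1) pf PySem.Dict.empty) (matchA items)
  let avoid := PySem.Set.ofList atf.values
  items.foldl (fun clean pr =>
    pr.1.foldl (fun clean k =>
      if avoid.contains k then clean else PySem.Set.add clean k) clean)
    PySem.Set.empty

-- ===== PORT B =====
-- by_allergen[a] = the ingredient sets of every line listing allergen a (in line order)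
def byAlB (items : List (List String × List String)) : PySem.Dict String (List (PySem.Set String)) :=
  items.foldl (fun m pr =>
    (PySem.List.dedup pr.2).foldl (fun m a => m.modify a [] (· ++ [PySem.Set.ofList pr.1])) m)
    PySem.Dict.empty

-- cand[a] = set.intersection over a's group: members of the first set present in all
def candB (items : List (List String × List String)) : PySem.Dict String (PySem.Set String) :=
  PySem.Dict.mk ((byAlB items).items.map (fun pr =>
    (pr.1, PySem.Set.ofList ((pr.2.headD []).filter (fun f => pr.2.all (fun l => l.contains f))))))

-- containing[f] = allergens whose candidate set holds f (setdefault/append loop)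
def containingB (cand : PySem.Dict String (PySem.Set String)) : PySem.Dict String (List String) :=
  cand.items.foldl (fun m pr =>
    pr.2.foldl (fun m f => m.modify f [] (· ++ [pr.1])) m) PySem.Dict.empty

-- the worklist: queue indexed from the front (suffix list), counters, done/resolved sets;
-- the fuel is an upper bound on the iterations (each pass resolves an allergen, each skip
-- consumes a queue entry, and at most |cand| entries are appended per resolution)
def loopB (cand : PySem.Dict String (PySem.Set String))
    (containing : PySem.Dict String (List String)) :
    Nat → List String → PySem.Set String → PySem.Set String → PySem.Dict String Int →
    PySem.Set String
  | 0, _, _, res, _ => res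
  | _ + 1, [], _, res, _ => res
  | f + 1, a :: rest, done, res, cnt =>
    if done.contains a then loopB cand containing f rest done res cnt
    else
      let rem := (cand.getD a []).filter (fun x => !res.contains x)
      if rem.length == 1 then
        let done' := PySem.Set.add done a
        let res' := PySem.Set.add res (rem.headD "")
        let st := (containing.getD (rem.headD "") []).foldl
          (fun (st : PySem.Dict String Int × List String) b =>
            if done'.contains b then st
            else
              let c := st.1.getD b 0 - 1
              (st.1.insert b c, if c == 1 then st.2 ++ [b] else st.2)) (cnt, rest)
        loopB cand containing f st.2 done' res' st.1
      else loopB cand containing f rest done res cnt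

def without_allergans_alt (items : List (List String × List String)) : List String :=
  let cand := candB items
  let containing := containingB cand
  let cnt := PySem.Dict.mk (cand.items.map (fun pr => (pr.1, (pr.2.length : Int))))
  let q0 := (cand.items.filter (fun pr => pr.2.length == 1)).map (fun pr => pr.1)
  let res := loopB cand containing ((cand.items.length + 1) * cand.items.length + q0.length + 1)
    q0 PySem.Set.empty PySem.Set.empty cnt
  items.foldl (fun out pr =>
    pr.1.foldl (fun out f =>
      if res.contains f then out else PySem.Set.add out f) out) PySem.Set.empty

-- ===== PRECONDITION & SPEC =====
def Spec_without_allergans (items : List (List String × List String)) (out : List String) : Prop := out = without_allergans_alt items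
instance (items : List (List String × List String)) (out : List String) : Decidable (Spec_without_allergans items out) := by unfold Spec_without_allergans; infer_instance

-- ===== CLAIM (what is proved, stated in full; the proofs are below) =====
def Claim_equal_without_allergans : Prop := ∀ (items : List (List String × List String)), Dom_without_allergans items → Spec_without_allergans items (without_allergans items)

-- ===== LEMMAS AND PROOFS =====


-- f is forced (derivable) for candidate table P: P a f holds and every other candidate of a is forced
inductive Deriv (P : String → String → Prop) : String → Prop where
  | step (a f : String) : P a f → (∀ g, P a g → g ≠ f → Deriv P g) → Deriv P f

theorem deriv_congr {P Q : String → String → Prop} (h : ∀ a f, P a f ↔ Q a f) {f : String}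
    (hd : Deriv P f) : Deriv Q f := by
  induction hd with
  | step a f hP _ ih => exact Deriv.step a f ((h a f).mp hP) (fun g hQ hne => ih g ((h a g).mpr hQ) hne)

theorem deriv_mem {P : String → String → Prop} (R : String → Prop)
    (closed : ∀ a f, P a f → (∀ g, P a g → g ≠ f → R g) → R f) {f : String}
    (hd : Deriv P f) : R f := by
  induction hd with
  | step a f hP _ ih => exact closed a f hP ih

-- ---- characterization of one updateA round (phases p1/p2/p3) ----

def singFilter (L : List (String × PySem.Set String)) : List (String × PySem.Set String) :=
  L.filter (fun kv => kv.2.length == 1)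

def knAfter (kn : PySem.Dict String String) (L : List (String × PySem.Set String)) :
    PySem.Dict String String :=
  PySem.Dict.mk (kn.items ++ (singFilter L).map (fun kv => (kv.1, kv.2.headD "")))

def dAfter (L : List (String × PySem.Set String)) (knf : PySem.Set String) :
    PySem.Dict String (PySem.Set String) :=
  PySem.Dict.mk ((L.filter (fun kv => !(kv.2.length == 1))).map
    (fun kv => (kv.1, (PySem.Set.inter knf kv.2).foldl PySem.Set.discard kv.2)))

theorem p1_eq (L : List (String × PySem.Set String)) (kn : PySem.Dict String String) (ch : Bool)
    (hnd : (L.map Prod.fst).Nodup) (hfresh : ∀ kv ∈ L, kv.1 ∉ kn.keys) :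
    L.foldl (fun (acc : PySem.Dict String String × Bool) kv =>
        if kv.2.length == 1 then (acc.1.insert kv.1 (kv.2.headD ""), true) else acc) (kn, ch)
    = (PySem.Dict.mk (kn.items ++ (singFilter L).map (fun kv => (kv.1, kv.2.headD ""))),
       ch || L.any (fun kv => kv.2.length == 1)) := by
  induction L generalizing kn ch with
  | nil => simp [singFilter]
  | cons kv rest ih =>
    simp only [List.map_cons, List.nodup_cons] at hnd
    by_cases hp : (kv.2.length == 1) = true
    · have hfr : kv.1 ∉ kn.keys := hfresh kv (by simp)
      have hc : kn.contains kv.1 = false := by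
        simp only [PySem.Dict.keys, List.mem_map] at hfr
        simp only [PySem.Dict.contains]
        refine List.any_eq_false.mpr ?_
        intro pq hpq
        exact fun he => hfr ⟨pq, hpq, beq_iff_eq.mp he⟩
      have hins : kn.insert kv.1 (kv.2.headD "") =
          PySem.Dict.mk (kn.items ++ [(kv.1, kv.2.headD "")]) := by
        simp [PySem.Dict.insert, hc]
      have hfresh' : ∀ kv' ∈ rest, kv'.1 ∉ (kn.insert kv.1 (kv.2.headD "")).keys := by
        intro kv' hkv'
        rw [hins]
        simp only [PySem.Dict.keys, List.map_append, List.mem_append, List.map_cons]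
        rintro (h | h)
        · exact hfresh kv' (by simp [hkv']) h
        · simp at h
          exact hnd.1 (h ▸ (List.mem_map_of_mem hkv'))
      rw [List.foldl_cons, if_pos hp]
      rw [ih _ _ hnd.2 hfresh']
      rw [hins]
      simp [singFilter, hp]
    · rw [List.foldl_cons, if_neg hp]
      rw [ih _ _ hnd.2 (fun kv' h => hfresh kv' (by simp [h]))]
      simp [singFilter, hp]

theorem p2_eq (ks : List String) (d : PySem.Dict String (PySem.Set String)) (ch : Bool)
    (hnd : ks.Nodup) :
    ks.foldl (fun (acc : PySem.Dict String (PySem.Set String) × Bool) a =>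
        if acc.1.contains a then (acc.1.erase a, true) else acc) (d, ch)
    = (PySem.Dict.mk (d.items.filter (fun kv => !decide (kv.1 ∈ ks))),
       ch || ks.any (fun a => d.contains a)) := by
  induction ks generalizing d ch with
  | nil => simp
  | cons a rest ih =>
    have hbeq : ∀ kv : String × PySem.Set String, (kv.1 == a) = decide (kv.1 = a) := by
      intro kv; by_cases h : kv.1 = a <;> simp [h]
    rw [List.foldl_cons]
    by_cases hc : d.contains a = true
    · rw [if_pos hc, ih (d.erase a) true hnd.of_cons]
      refine Prod.ext ?_ ?_
      · show PySem.Dict.mk _ = PySem.Dict.mk _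
        apply congrArg
        simp only [PySem.Dict.erase, List.filter_filter]
        apply List.filter_congr
        intro kv _
        rw [hbeq kv]
        by_cases h1 : kv.1 = a <;> by_cases h2 : kv.1 ∈ rest <;>
          simp [h1, h2]
      · simp [hc]
    · rw [if_neg hc, ih d ch hnd.of_cons]
      have hne : ∀ kv ∈ d.items, kv.1 ≠ a := by
        intro kv hkv heq
        apply hc
        simp only [PySem.Dict.contains, List.any_eq_true]
        exact ⟨kv, hkv, by simp [heq]⟩
      refine Prod.ext ?_ ?_
      · show PySem.Dict.mk _ = PySem.Dict.mk _
        apply congrArg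
        apply List.filter_congr
        intro kv hkv
        simp [List.mem_cons, hne kv hkv]
      · simp [eq_false_of_ne_true hc]

theorem modify_split (pre post : List (String × PySem.Set String)) (k : String)
    (v : PySem.Set String) (f : PySem.Set String → PySem.Set String)
    (hnd : ((pre ++ (k, v) :: post).map Prod.fst).Nodup) :
    (PySem.Dict.mk (pre ++ (k, v) :: post)).modify k PySem.Set.empty f
      = PySem.Dict.mk (pre ++ (k, f v) :: post) := by
  rw [List.map_append, List.map_cons] at hnd
  obtain ⟨nd1, nd2, disj⟩ := List.nodup_append.mp hnd
  have hpre : ∀ q ∈ pre, q.1 ≠ k := by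
    intro q hq heq
    exact disj q.1 (List.mem_map_of_mem hq) k (by simp) heq
  have hpost : ∀ q ∈ post, q.1 ≠ k := by
    intro q hq heq
    exact (List.nodup_cons.mp nd2).1 (by simpa [heq] using List.mem_map_of_mem (f := Prod.fst) hq)
  have hget : (PySem.Dict.mk (pre ++ (k, v) :: post)).getD k PySem.Set.empty = v := by
    simp only [PySem.Dict.getD, PySem.Dict.get?, List.find?_append]
    have h1 : pre.find? (fun p => p.1 == k) = none := by
      rw [List.find?_eq_none]
      intro q hq; simpa using hpre q hq
    rw [h1]
    simp
  have hcont : (PySem.Dict.mk (pre ++ (k, v) :: post)).contains k = true := by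
    simp only [PySem.Dict.contains, List.any_eq_true]
    exact ⟨(k, v), by simp, by simp⟩
  have hmap : ∀ (l : List (String × PySem.Set String)), (∀ q ∈ l, q.1 ≠ k) →
      l.map (fun p => if (p.1 == k) = true then (k, f v) else p) = l := by
    intro l hl
    rw [List.map_congr_left (g := id) ?_, List.map_id]
    intro q hq
    simp [hl q hq]
  simp only [PySem.Dict.modify, hget, PySem.Dict.insert, hcont, if_true]
  apply congrArg
  simp only [List.map_append, List.map_cons]
  rw [hmap pre hpre, hmap post hpost]
  simp

theorem inner_eq (xs : List String) (pre post : List (String × PySem.Set String)) (k : String)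
    (v : PySem.Set String) (ch : Bool)
    (hnd : ((pre ++ (k, v) :: post).map Prod.fst).Nodup) :
    xs.foldl (fun (acc2 : PySem.Dict String (PySem.Set String) × Bool) x =>
        (acc2.1.modify k PySem.Set.empty (fun s => PySem.Set.discard s x), true))
      (PySem.Dict.mk (pre ++ (k, v) :: post), ch)
    = (PySem.Dict.mk (pre ++ (k, xs.foldl PySem.Set.discard v) :: post), ch || !xs.isEmpty) := by
  induction xs generalizing v ch with
  | nil => simp
  | cons x xs ih =>
    rw [List.foldl_cons, modify_split pre post k v _ hnd]
    have hnd' : ((pre ++ (k, PySem.Set.discard v x) :: post).map Prod.fst).Nodup := by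
      simpa using hnd
    rw [ih (PySem.Set.discard v x) true hnd']
    simp

theorem p3_eq (knf : PySem.Set String) :
    ∀ (snap pre : List (String × PySem.Set String)) (ch : Bool),
    ((pre ++ snap).map Prod.fst).Nodup →
    snap.foldl (fun (acc : PySem.Dict String (PySem.Set String) × Bool) kv =>
        (PySem.Set.inter knf kv.2).foldl
          (fun (acc2 : PySem.Dict String (PySem.Set String) × Bool) x =>
            (acc2.1.modify kv.1 PySem.Set.empty (fun s => PySem.Set.discard s x), true))
          acc)
      (PySem.Dict.mk (pre ++ snap), ch)
    = (PySem.Dict.mk (pre ++ snap.map (fun kv =>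
         (kv.1, (PySem.Set.inter knf kv.2).foldl PySem.Set.discard kv.2))),
       ch || snap.any (fun kv => !(PySem.Set.inter knf kv.2).isEmpty)) := by
  intro snap
  induction snap with
  | nil => intro pre ch _; simp
  | cons kv rest ih =>
    intro pre ch hnd
    rw [List.foldl_cons]
    rw [show (PySem.Dict.mk (pre ++ kv :: rest), ch)
          = (PySem.Dict.mk (pre ++ (kv.1, kv.2) :: rest), ch) from rfl]
    rw [inner_eq _ pre rest kv.1 kv.2 ch (by simpa using hnd)]
    have hnd' : ((( pre ++ [(kv.1, (PySem.Set.inter knf kv.2).foldl PySem.Set.discard kv.2)]) ++ rest).map Prod.fst).Nodup := by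
      simpa using hnd
    have := ih (pre ++ [(kv.1, (PySem.Set.inter knf kv.2).foldl PySem.Set.discard kv.2)])
      (ch || !(PySem.Set.inter knf kv.2).isEmpty) hnd'
    rw [List.append_assoc] at this
    simp only [List.singleton_append] at this
    rw [this]
    simp [Bool.or_assoc]

def chAfter (L : List (String × PySem.Set String)) (kn : PySem.Dict String String)
    (d : PySem.Dict String (PySem.Set String)) : Bool :=
  ((false || L.any (fun kv => kv.2.length == 1)) ||
    (knAfter kn L).keys.any (fun a => d.contains a)) ||
  (L.filter (fun kv => !(kv.2.length == 1))).any
    (fun kv => !(PySem.Set.inter (PySem.Set.ofList (knAfter kn L).values) kv.2).isEmpty)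

theorem updateA_eq (d : PySem.Dict String (PySem.Set String)) (kn : PySem.Dict String String)
    (h1 : (d.items.map Prod.fst).Nodup) (h3 : (kn.items.map Prod.fst).Nodup)
    (h2 : ∀ kv ∈ d.items, kv.1 ∉ kn.keys) :
    updateA d kn = (dAfter d.items (PySem.Set.ofList (knAfter kn d.items).values),
      knAfter kn d.items, chAfter d.items kn d) := by
  have hsingsub : ∀ kv ∈ singFilter d.items, kv ∈ d.items := by
    intro kv hkv; exact List.mem_of_mem_filter hkv
  have hsingnd : ((singFilter d.items).map Prod.fst).Nodup := by
    unfold singFilter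
    exact (List.filter_sublist.map Prod.fst).nodup h1
  have hknkeys : (knAfter kn d.items).keys
      = kn.keys ++ (singFilter d.items).map Prod.fst := by
    simp only [knAfter, PySem.Dict.keys, List.map_append, List.map_map]
    rfl
  have hkn1nd : (knAfter kn d.items).keys.Nodup := by
    rw [hknkeys]
    rw [List.nodup_append]
    refine ⟨h3, hsingnd, ?_⟩
    intro a ha b hb heq
    rcases List.mem_map.mp hb with ⟨kv, hkv, hkvb⟩
    exact h2 kv (hsingsub kv hkv) (by rw [hkvb, ← heq]; exact ha)
  have hinj := List.inj_on_of_nodup_map h1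
  have hfilt : d.items.filter (fun kv => !decide (kv.1 ∈ (knAfter kn d.items).keys))
      = d.items.filter (fun kv => !(kv.2.length == 1)) := by
    apply List.filter_congr
    intro kv hkv
    apply congrArg
    rw [hknkeys]
    by_cases hl : (kv.2.length == 1) = true
    · have : kv.1 ∈ (singFilter d.items).map Prod.fst :=
        List.mem_map_of_mem (by unfold singFilter; exact List.mem_filter.mpr ⟨hkv, hl⟩)
      simp [hl, List.mem_append, this]
    · have hnot : kv.1 ∉ (singFilter d.items).map Prod.fst := by
        intro hmem
        rcases List.mem_map.mp hmem with ⟨kv', hkv', heq⟩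
        have : kv' = kv := hinj (hsingsub kv' hkv') hkv heq
        rw [this] at hkv'
        exact hl (List.mem_filter.mp hkv').2
      simp [hl, List.mem_append, hnot, h2 kv hkv]
  unfold updateA
  rw [p1_eq d.items kn false h1 h2]
  dsimp only
  rw [p2_eq _ d _ (by simpa [knAfter] using hkn1nd)]
  dsimp only
  rw [show PySem.Dict.mk (kn.items ++ (singFilter d.items).map
        (fun kv : String × PySem.Set String => (kv.1, kv.2.headD ""))) = knAfter kn d.items from rfl]
  rw [hfilt]
  have hnd' : (([] ++ d.items.filter (fun kv : String × PySem.Set String => !(kv.2.length == 1))).map Prod.fst).Nodup := by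
    simp only [List.nil_append]
    exact (List.filter_sublist.map Prod.fst).nodup h1
  have hp3 := p3_eq (PySem.Set.ofList (knAfter kn d.items).values)
      (d.items.filter (fun kv : String × PySem.Set String => !(kv.2.length == 1))) []
      ((false || d.items.any fun kv => kv.2.length == 1) ||
        (knAfter kn d.items).keys.any (fun a => d.contains a)) hnd'
  simp only [List.nil_append] at hp3
  rw [hp3]
  rfl

theorem mem_foldl_discard (xs : List String) (s : PySem.Set String) (x : String) :
    x ∈ xs.foldl PySem.Set.discard s ↔ x ∈ s ∧ x ∉ xs := by
  induction xs generalizing s with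
  | nil => simp
  | cons y ys ih =>
    rw [List.foldl_cons, ih, PySem.Set.mem_discard]
    constructor
    · rintro ⟨⟨h1, h2⟩, h3⟩; exact ⟨h1, by simp [h2, h3]⟩
    · rintro ⟨h1, h2⟩
      simp only [List.mem_cons, not_or] at h2
      exact ⟨⟨h1, h2.1⟩, h2.2⟩

theorem nodup_foldl_discard (xs : List String) (s : PySem.Set String) (h : s.Nodup) :
    (xs.foldl PySem.Set.discard s).Nodup := by
  induction xs generalizing s with
  | nil => exact h
  | cons y ys ih => exact ih _ (PySem.Set.nodup_discard s y h)


-- candidate predicate read off a dict of candidate sets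
def PAp (C0 : PySem.Dict String (PySem.Set String)) (a f : String) : Prop :=
  C0.contains a = true ∧ f ∈ C0.getD a []

-- invariant of A's while-loop state (d = still-pending allergen sets, kn = resolved map),
-- relative to the initial table C0
def InvA (C0 d : PySem.Dict String (PySem.Set String)) (kn : PySem.Dict String String) : Prop :=
  (d.items.map Prod.fst).Nodup ∧
  (kn.items.map Prod.fst).Nodup ∧
  (∀ kv ∈ d.items, kv.1 ∉ kn.keys) ∧
  (∀ kv ∈ d.items, kv.2.Nodup) ∧
  (∀ kv ∈ d.items, C0.contains kv.1 = true ∧ (∀ x ∈ kv.2, x ∈ C0.getD kv.1 []) ∧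
      (∀ x ∈ C0.getD kv.1 [], x ∉ kv.2 → x ∈ kn.values)) ∧
  (∀ a ∈ kn.keys, ∀ x ∈ C0.getD a [], x ∈ kn.values) ∧
  (∀ kv ∈ d.items, ∀ x ∈ kv.2, x ∉ kn.values) ∧
  (∀ x ∈ kn.values, Deriv (PAp C0) x) ∧
  (∀ a, C0.contains a = true → a ∈ d.keys ∨ a ∈ kn.keys)

theorem knAfter_keys (kn : PySem.Dict String String) (L : List (String × PySem.Set String)) :
    (knAfter kn L).keys = kn.keys ++ (singFilter L).map Prod.fst := by
  simp only [knAfter, PySem.Dict.keys, List.map_append, List.map_map]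
  rfl

theorem knAfter_values (kn : PySem.Dict String String) (L : List (String × PySem.Set String)) :
    (knAfter kn L).values = kn.values ++ (singFilter L).map (fun kv => kv.2.headD "") := by
  simp only [knAfter, PySem.Dict.values, List.map_append, List.map_map]
  rfl

theorem stepA (C0 d : PySem.Dict String (PySem.Set String)) (kn : PySem.Dict String String)
    (hI : InvA C0 d kn) :
    ((updateA d kn).2.2 = false →
       (updateA d kn).2.1.values = kn.values ∧ ∀ kv ∈ d.items, kv.2.length ≠ 1) ∧
    ((updateA d kn).2.2 = true →
       InvA C0 (updateA d kn).1 (updateA d kn).2.1 ∧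
       (updateA d kn).1.items.length < d.items.length) := by
  obtain ⟨hdk, hkk, hfr, hvn, hrel, hknk, hdr, hsnd, hcov⟩ := hI
  have hup := updateA_eq d kn hdk hkk hfr
  have hknkeys := knAfter_keys kn d.items
  have hknvals := knAfter_values kn d.items
  have hsing_mem : ∀ kv ∈ singFilter d.items, kv ∈ d.items ∧ kv.2.length = 1 := by
    intro kv hkv
    have := List.mem_filter.mp hkv
    exact ⟨this.1, by simpa using this.2⟩
  have hheads : ∀ kv ∈ singFilter d.items,
      kv.2.headD "" ∈ (knAfter kn d.items).values := by
    intro kv hkv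
    rw [hknvals]
    exact List.mem_append_right _ (List.mem_map_of_mem hkv)
  constructor
  · -- flag false: nothing changed
    intro hfl
    rw [hup] at hfl
    simp only [chAfter, Bool.or_eq_false_iff, Bool.false_or] at hfl
    have he1 : ∀ kv ∈ d.items, ¬(kv.2.length == 1) = true :=
      List.any_eq_false.mp hfl.1.1
    have hsingnil : singFilter d.items = [] := by
      unfold singFilter
      rw [List.filter_eq_nil_iff]
      intro kv hkv
      simp [he1 kv hkv]
    constructor
    · rw [hup]
      dsimp only
      rw [hknvals, hsingnil]
      simp
    · intro kv hkv h1
      have := he1 kv hkv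
      simp [h1] at this
  · -- flag true: invariant preserved, d strictly shrinks
    intro hfl
    rw [hup] at hfl ⊢
    dsimp only at hfl ⊢
    -- a singleton must exist
    have hSne : singFilter d.items ≠ [] := by
      intro hS
      have he1 : d.items.any (fun kv => kv.2.length == 1) = false := by
        rw [List.any_eq_false]
        intro kv hkv hb
        have : kv ∈ singFilter d.items := List.mem_filter.mpr ⟨hkv, hb⟩
        simp [hS] at this
      have he2 : (knAfter kn d.items).keys.any (fun a => d.contains a) = false := by
        rw [List.any_eq_false]
        intro a ha hc
        rw [hknkeys, hS] at ha
        simp only [List.map_nil, List.append_nil] at ha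
        rw [show d.contains a = d.items.any (fun q => q.1 == a) from rfl, List.any_eq_true] at hc
        obtain ⟨kv, hkv, hb⟩ := hc
        exact hfr kv hkv ((beq_iff_eq.mp hb) ▸ ha)
      have he3 : (d.items.filter (fun kv => !(kv.2.length == 1))).any
          (fun kv => !(PySem.Set.inter (PySem.Set.ofList (knAfter kn d.items).values) kv.2).isEmpty) = false := by
        rw [List.any_eq_false]
        intro kv hkv
        have hkv' : kv ∈ d.items := List.mem_of_mem_filter hkv
        have : PySem.Set.inter (PySem.Set.ofList (knAfter kn d.items).values) kv.2 = [] := by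
          rw [List.eq_nil_iff_forall_not_mem]
          intro x hx
          rw [PySem.Set.mem_inter, PySem.Set.mem_ofList, hknvals, hS] at hx
          simp only [List.map_nil, List.append_nil] at hx
          exact hdr kv hkv' x hx.2 hx.1
        simp [this]
      simp only [chAfter, he1, he2, he3, Bool.or_false] at hfl
      exact Bool.false_ne_true hfl
    obtain ⟨kvS, hkvS⟩ := List.exists_mem_of_ne_nil _ hSne
    set knf := PySem.Set.ofList (knAfter kn d.items).values with hknf
    have hd'items : (dAfter d.items knf).items
        = (d.items.filter (fun kv => !(kv.2.length == 1))).map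
            (fun kv => (kv.1, (PySem.Set.inter knf kv.2).foldl PySem.Set.discard kv.2)) := rfl
    -- membership in a purged set
    have hmem' : ∀ (kv : String × PySem.Set String) (x : String),
        x ∈ (PySem.Set.inter knf kv.2).foldl PySem.Set.discard kv.2 ↔
          x ∈ kv.2 ∧ x ∉ (knAfter kn d.items).values := by
      intro kv x
      rw [mem_foldl_discard]
      constructor
      · rintro ⟨h1, h2⟩
        refine ⟨h1, fun hv => h2 ?_⟩
        rw [PySem.Set.mem_inter, PySem.Set.mem_ofList]
        exact ⟨hv, h1⟩
      · rintro ⟨h1, h2⟩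
        refine ⟨h1, fun hi => h2 ?_⟩
        rw [PySem.Set.mem_inter, PySem.Set.mem_ofList] at hi
        exact hi.1
    have hsingnd : ((singFilter d.items).map Prod.fst).Nodup := by
      unfold singFilter
      exact (List.filter_sublist.map Prod.fst).nodup hdk
    have hinj := List.inj_on_of_nodup_map hdk
    have hkn'nd : (knAfter kn d.items).keys.Nodup := by
      rw [hknkeys, List.nodup_append]
      refine ⟨hkk, hsingnd, ?_⟩
      intro a ha b hb heq
      rcases List.mem_map.mp hb with ⟨kv, hkv, hkvb⟩
      exact hfr kv (hsing_mem kv hkv).1 (by rw [hkvb, ← heq]; exact ha)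
    have hsingle : ∀ kv ∈ singFilter d.items, kv.2 = [kv.2.headD ""] := by
      intro kv hkv
      obtain ⟨h, hl⟩ := hsing_mem kv hkv
      obtain ⟨y, hy⟩ := List.length_eq_one_iff.mp hl
      rw [hy]; rfl
    constructor
    · -- invariant for the new state
      refine ⟨?_, ?_, ?_, ?_, ?_, ?_, ?_, ?_, ?_⟩
      · rw [show (dAfter d.items knf).items.map Prod.fst
            = (d.items.filter (fun kv => !(kv.2.length == 1))).map Prod.fst by
              rw [hd'items, List.map_map]; rfl]
        exact (List.filter_sublist.map Prod.fst).nodup hdk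
      · simpa [PySem.Dict.keys] using hkn'nd
      · intro kv hkv
        rw [hd'items] at hkv
        rcases List.mem_map.mp hkv with ⟨kv0, h0, rfl⟩
        rw [show (kv0.1, (PySem.Set.inter knf kv0.2).foldl PySem.Set.discard kv0.2).1 = kv0.1 from rfl]
        rw [hknkeys]
        intro hmem
        rcases List.mem_append.mp hmem with hmem | hmem
        · exact hfr kv0 (List.mem_of_mem_filter h0) hmem
        · rcases List.mem_map.mp hmem with ⟨kv1, hkv1, heq⟩
          have : kv1 = kv0 := hinj (hsing_mem kv1 hkv1).1 (List.mem_of_mem_filter h0) heq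
          rw [this] at hkv1
          have hl := (List.mem_filter.mp hkv1).2
          have hl' := (List.mem_filter.mp h0).2
          simp [hl] at hl'
      · intro kv hkv
        rw [hd'items] at hkv
        rcases List.mem_map.mp hkv with ⟨kv0, h0, rfl⟩
        exact nodup_foldl_discard _ _ (hvn kv0 (List.mem_of_mem_filter h0))
      · intro kv hkv
        rw [hd'items] at hkv
        rcases List.mem_map.mp hkv with ⟨kv0, h0, rfl⟩
        have h0' := List.mem_of_mem_filter h0
        obtain ⟨hc0, hsub0, hcomp0⟩ := hrel kv0 h0'
        refine ⟨hc0, ?_, ?_⟩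
        · intro x hx
          exact hsub0 x ((hmem' kv0 x).mp hx).1
        · intro x hx hnx
          by_cases hxin : x ∈ kv0.2
          · by_cases hv : x ∈ (knAfter kn d.items).values
            · exact hv
            · exact absurd ((hmem' kv0 x).mpr ⟨hxin, hv⟩) hnx
          · rw [hknvals]
            exact List.mem_append_left _ (hcomp0 x hx hxin)
      · intro a ha
        rw [hknkeys] at ha
        rcases List.mem_append.mp ha with ha | ha
        · intro x hx
          rw [hknvals]
          exact List.mem_append_left _ (hknk a ha x hx)
        · rcases List.mem_map.mp ha with ⟨kv, hkv, rfl⟩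
          obtain ⟨hkvd, hl⟩ := hsing_mem kv hkv
          obtain ⟨hc0, hsub0, hcomp0⟩ := hrel kv hkvd
          intro x hx
          by_cases hxin : x ∈ kv.2
          · have : x = kv.2.headD "" := by
              rw [hsingle kv hkv] at hxin
              simpa using hxin
            rw [this]
            exact hheads kv hkv
          · rw [hknvals]
            exact List.mem_append_left _ (hcomp0 x hx hxin)
      · intro kv hkv x hx
        rw [hd'items] at hkv
        rcases List.mem_map.mp hkv with ⟨kv0, h0, rfl⟩
        exact ((hmem' kv0 x).mp hx).2
      · intro x hx
        rw [hknvals] at hx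
        rcases List.mem_append.mp hx with hx | hx
        · exact hsnd x hx
        · rcases List.mem_map.mp hx with ⟨kv, hkv, rfl⟩
          obtain ⟨hkvd, hl⟩ := hsing_mem kv hkv
          obtain ⟨hc0, hsub0, hcomp0⟩ := hrel kv hkvd
          have hmemh : kv.2.headD "" ∈ kv.2 := by
            rw [hsingle kv hkv]; simp
          refine Deriv.step kv.1 _ ⟨hc0, hsub0 _ hmemh⟩ ?_
          intro g hPg hne
          have hgk : g ∉ kv.2 := by
            rw [hsingle kv hkv]
            simpa using hne
          exact hsnd g (hcomp0 g hPg.2 hgk)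
      · intro a hca
        rcases hcov a hca with ha | ha
        · obtain ⟨sv, hs⟩ : ∃ sv, (a, sv) ∈ d.items := by
            simpa [PySem.Dict.keys, List.mem_map] using ha
          by_cases hl : (sv.length == 1) = true
          · right
            rw [hknkeys]
            refine List.mem_append_right _ ?_
            exact List.mem_map.mpr ⟨(a, sv), List.mem_filter.mpr ⟨hs, hl⟩, rfl⟩
          · left
            show a ∈ (dAfter d.items knf).items.map (fun p => p.1)
            rw [hd'items, List.map_map]
            exact List.mem_map.mpr ⟨(a, sv), List.mem_filter.mpr ⟨hs, by simp [hl]⟩, rfl⟩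
        · right
          rw [hknkeys]
          exact List.mem_append_left _ ha
    · -- strictly fewer pending allergens
      rw [hd'items, List.length_map, List.length_filter_lt_length_iff_exists]
      obtain ⟨hkvd, hl⟩ := hsing_mem kvS hkvS
      exact ⟨kvS, hkvd, by simp [hl]⟩

theorem loopA_SC (C0 : PySem.Dict String (PySem.Set String)) :
    ∀ (fuel : Nat) (d : PySem.Dict String (PySem.Set String)) (kn : PySem.Dict String String),
    InvA C0 d kn → d.items.length < fuel →
    (∀ x ∈ (loopA fuel d kn).values, Deriv (PAp C0) x) ∧
    (∀ a f, C0.contains a = true → f ∈ C0.getD a [] →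
      (∀ g ∈ C0.getD a [], g ≠ f → g ∈ (loopA fuel d kn).values) →
      f ∈ (loopA fuel d kn).values) := by
  intro fuel
  induction fuel with
  | zero => intro d kn _ h; exact absurd h (Nat.not_lt_zero _)
  | succ f ih =>
    intro d kn hI hlen
    have hstep := stepA C0 d kn hI
    have hL : loopA (f + 1) d kn
        = (if (updateA d kn).2.2 then loopA f (updateA d kn).1 (updateA d kn).2.1
           else (updateA d kn).2.1) := rfl
    by_cases hfl : (updateA d kn).2.2 = true
    · rw [hL, if_pos hfl]
      obtain ⟨hI', hlt⟩ := hstep.2 hfl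
      exact ih _ _ hI' (by omega)
    · rw [hL, if_neg hfl]
      obtain ⟨hvals, hnosing⟩ := hstep.1 (by simpa using hfl)
      rw [hvals]
      obtain ⟨hdk, hkk, hfr, hvn, hrel, hknk, hdr, hsnd, hcov⟩ := hI
      refine ⟨hsnd, ?_⟩
      intro a g hca hgm hothers
      rcases hcov a hca with ha | ha
      · obtain ⟨sv, hs⟩ : ∃ sv, (a, sv) ∈ d.items := by
          simpa [PySem.Dict.keys, List.mem_map] using ha
        obtain ⟨hc0, hsub0, hcomp0⟩ := hrel (a, sv) hs
        have hsub1 : ∀ x ∈ sv, x = g := by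
          intro x hx
          by_contra hne
          exact hdr (a, sv) hs x hx (hothers x (hsub0 x hx) hne)
        have hnil : sv = [] := by
          have hnd2 := hvn (a, sv) hs
          have hlen2 := hnosing (a, sv) hs
          match h2 : sv, hnd2, hlen2, hsub1 with
          | [], _, _, _ => rfl
          | [y], _, hl1, _ => exact absurd rfl hl1
          | y :: z :: t, hnd', _, hall =>
            have hy : y = g := hall y (by simp)
            have hz : z = g := hall z (by simp)
            rw [List.nodup_cons] at hnd'
            exact absurd (by simp [hy, hz.symm]) hnd'.1
        exact hcomp0 g hgm (by simp [hnil])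
      · exact hknk a ha g hgm

theorem getD_nodup_of_values (d : PySem.Dict String (PySem.Set String))
    (h : ∀ v ∈ d.values, v.Nodup) (k : String) : (d.getD k PySem.Set.empty).Nodup := by
  cases hs : d.get? k with
  | none => rw [PySem.Dict.getD_of_get?_eq_none _ _ hs]; exact List.nodup_nil
  | some v =>
    rw [PySem.Dict.getD_of_get?_eq_some _ _ hs]
    exact h v (List.mem_map.mpr ⟨(k, v), PySem.Dict.mem_items_of_get?_eq_some d hs, rfl⟩)

theorem alfold_nodups (ing : List String) :
    ∀ (als : List String) (d : PySem.Dict String (PySem.Set String)),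
    d.keys.Nodup → (∀ v ∈ d.values, v.Nodup) →
    (als.foldl (fun pf k =>
      if !pf.contains k then pf.insert k (PySem.Set.ofList ing)
      else pf.modify k PySem.Set.empty (fun s => PySem.Set.inter s (PySem.Set.ofList ing))) d).keys.Nodup ∧
    (∀ v ∈ (als.foldl (fun pf k =>
      if !pf.contains k then pf.insert k (PySem.Set.ofList ing)
      else pf.modify k PySem.Set.empty (fun s => PySem.Set.inter s (PySem.Set.ofList ing))) d).values, v.Nodup) := by
  intro als
  induction als with
  | nil => intro d h1 h2; exact ⟨h1, h2⟩
  | cons k als ih =>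
    intro d h1 h2
    rw [List.foldl_cons]
    by_cases hc : d.contains k = true
    · rw [if_neg (by simp [hc])]
      rw [show d.modify k PySem.Set.empty (fun s => PySem.Set.inter s (PySem.Set.ofList ing))
          = d.insert k (PySem.Set.inter (d.getD k PySem.Set.empty) (PySem.Set.ofList ing)) from rfl]
      refine ih _ (PySem.Dict.nodup_keys_insert _ _ _ h1) ?_
      intro v hv
      rcases PySem.Dict.mem_values_insert _ _ _ _ hv with rfl | hv'
      · exact PySem.Set.nodup_inter _ _ (getD_nodup_of_values d h2 k)
      · exact h2 v hv'
    · rw [if_pos (by simp [hc])]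
      refine ih _ (PySem.Dict.nodup_keys_insert _ _ _ h1) ?_
      intro v hv
      rcases PySem.Dict.mem_values_insert _ _ _ _ hv with rfl | hv'
      · exact PySem.Set.nodup_ofList ing
      · exact h2 v hv'

theorem matchA_nodups (items : List (List String × List String)) :
    (matchA items).keys.Nodup ∧ ∀ v ∈ (matchA items).values, v.Nodup := by
  unfold matchA
  generalize hA : (PySem.Dict.empty : PySem.Dict String (PySem.Set String)) = d0
  have h1 : d0.keys.Nodup := by rw [← hA]; simp [PySem.Dict.empty, PySem.Dict.keys]
  have h2 : ∀ v ∈ d0.values, v.Nodup := by rw [← hA]; simp [PySem.Dict.empty, PySem.Dict.values]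
  clear hA
  induction items generalizing d0 with
  | nil => exact ⟨h1, h2⟩
  | cons pr rest ih =>
    rw [List.foldl_cons]
    obtain ⟨g1, g2⟩ := alfold_nodups pr.1 pr.2 d0 h1 h2
    exact ih _ g1 g2

theorem invA_init (items : List (List String × List String)) :
    InvA (matchA items) (matchA items) PySem.Dict.empty := by
  obtain ⟨hk, hv⟩ := matchA_nodups items
  have hknd : ((matchA items).items.map Prod.fst).Nodup := by
    simpa [PySem.Dict.keys] using hk
  refine ⟨hknd, ?_, ?_, ?_, ?_, ?_, ?_, ?_, ?_⟩
  · simp [PySem.Dict.empty]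
  · intro kv _; simp [PySem.Dict.empty, PySem.Dict.keys]
  · intro kv hkv
    exact hv kv.2 (List.mem_map.mpr ⟨kv, hkv, rfl⟩)
  · intro kv hkv
    have hmem : (kv.1, kv.2) ∈ (matchA items).items := hkv
    have hgd : (matchA items).getD kv.1 [] = kv.2 :=
      PySem.Dict.getD_of_mem_items _ hmem hk []
    refine ⟨?_, ?_, ?_⟩
    · exact (PySem.Dict.contains_iff_mem_keys _ _).mpr (List.mem_map.mpr ⟨kv, hkv, rfl⟩)
    · intro x hx; rw [hgd]; exact hx
    · intro x hx hnx
      rw [hgd] at hx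
      exact absurd hx hnx
  · intro a ha; simp [PySem.Dict.empty, PySem.Dict.keys] at ha
  · intro kv _ x _; simp [PySem.Dict.empty, PySem.Dict.values]
  · intro x hx; simp [PySem.Dict.empty, PySem.Dict.values] at hx
  · intro a hca
    left
    exact (PySem.Dict.contains_iff_mem_keys _ _).mp hca

theorem A_values_iff_deriv (items : List (List String × List String)) (x : String) :
    x ∈ (loopA ((matchA items).items.length + 1) (matchA items) PySem.Dict.empty).values ↔
      Deriv (PAp (matchA items)) x := by
  obtain ⟨hsound, hclosed⟩ := loopA_SC (matchA items) ((matchA items).items.length + 1)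
    (matchA items) PySem.Dict.empty (invA_init items) (by omega)
  constructor
  · exact hsound x
  · intro hd
    refine deriv_mem _ ?_ hd
    intro a f hP hprem
    exact hclosed a f hP.1 hP.2 (fun g hg hne => hprem g ⟨hP.1, hg⟩ hne)

-- what f ∈ cand(a) means in terms of the raw input lines
def SpecAF (items : List (List String × List String)) (a f : String) : Prop :=
  (∃ pr ∈ items, a ∈ pr.2) ∧ ∀ pr ∈ items, a ∈ pr.2 → f ∈ pr.1

theorem alfold_mem (ing : List String) :
    ∀ (als : List String) (d : PySem.Dict String (PySem.Set String)) (a f : String),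
    ((als.foldl (fun pf k =>
      if !pf.contains k then pf.insert k (PySem.Set.ofList ing)
      else pf.modify k PySem.Set.empty (fun s => PySem.Set.inter s (PySem.Set.ofList ing))) d).contains a = true ∧
     f ∈ (als.foldl (fun pf k =>
      if !pf.contains k then pf.insert k (PySem.Set.ofList ing)
      else pf.modify k PySem.Set.empty (fun s => PySem.Set.inter s (PySem.Set.ofList ing))) d).getD a [])
    ↔ (((d.contains a = true ∧ f ∈ d.getD a []) ∨ (d.contains a = false ∧ a ∈ als)) ∧
       (a ∈ als → f ∈ ing)) := by
  intro als
  induction als with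
  | nil => simp
  | cons k als ih =>
    intro d a f
    rw [List.foldl_cons, ih]
    have hempty : (PySem.Set.empty : PySem.Set String) = [] := rfl
    by_cases hak : a = k
    · subst hak
      by_cases hcd : d.contains a = true
      · have hstep : (if !d.contains a then d.insert a (PySem.Set.ofList ing)
            else d.modify a PySem.Set.empty (fun s => PySem.Set.inter s (PySem.Set.ofList ing)))
            = d.modify a PySem.Set.empty (fun s => PySem.Set.inter s (PySem.Set.ofList ing)) := by
          rw [if_neg (by simp [hcd])]
        have hcc : (d.modify a PySem.Set.empty (fun s => PySem.Set.inter s (PySem.Set.ofList ing))).contains a = true := by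
          rw [PySem.Dict.contains_modify]; simp
        have hg : (d.modify a PySem.Set.empty (fun s => PySem.Set.inter s (PySem.Set.ofList ing))).getD a []
            = PySem.Set.inter (d.getD a []) (PySem.Set.ofList ing) := by
          rw [← hempty]
          exact PySem.Dict.getD_modify_self _ _ _ _
        rw [hstep, hcc, hg]
        simp [PySem.Set.mem_inter, PySem.Set.mem_ofList, hcd]
        tauto
      · have hcf : d.contains a = false := by simpa using hcd
        have hstep : (if !d.contains a then d.insert a (PySem.Set.ofList ing)
            else d.modify a PySem.Set.empty (fun s => PySem.Set.inter s (PySem.Set.ofList ing)))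
            = d.insert a (PySem.Set.ofList ing) := by
          rw [if_pos (by simp [hcf])]
        have hcc : (d.insert a (PySem.Set.ofList ing)).contains a = true :=
          PySem.Dict.contains_insert_self _ _ _
        have hg : (d.insert a (PySem.Set.ofList ing)).getD a [] = PySem.Set.ofList ing :=
          PySem.Dict.getD_insert_self _ _ _ _
        rw [hstep, hcc, hg]
        simp [PySem.Set.mem_ofList, hcf]
        tauto
    · have hc1 : (if !d.contains k then d.insert k (PySem.Set.ofList ing)
          else d.modify k PySem.Set.empty (fun s => PySem.Set.inter s (PySem.Set.ofList ing))).contains a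
          = d.contains a := by
        by_cases hc : d.contains k = true
        · rw [if_neg (by simp [hc]), PySem.Dict.contains_modify]
          simp [hak]
        · rw [if_pos (by simp [hc]), PySem.Dict.contains_insert]
          simp [hak]
      have hg2 : (if !d.contains k then d.insert k (PySem.Set.ofList ing)
          else d.modify k PySem.Set.empty (fun s => PySem.Set.inter s (PySem.Set.ofList ing))).getD a []
          = d.getD a [] := by
        by_cases hc : d.contains k = true
        · rw [if_neg (by simp [hc])]
          rw [show d.modify k PySem.Set.empty (fun s => PySem.Set.inter s (PySem.Set.ofList ing))
              = d.insert k (PySem.Set.inter (d.getD k PySem.Set.empty) (PySem.Set.ofList ing)) from rfl]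
          rw [PySem.Dict.getD_insert]
          simp [hak]
        · rw [if_pos (by simp [hc]), PySem.Dict.getD_insert]
          simp [hak]
      rw [hc1, hg2]
      simp [hak]


theorem alfold_contains (ing : List String) :
    ∀ (als : List String) (d : PySem.Dict String (PySem.Set String)) (a : String),
    ((als.foldl (fun pf k =>
      if !pf.contains k then pf.insert k (PySem.Set.ofList ing)
      else pf.modify k PySem.Set.empty (fun s => PySem.Set.inter s (PySem.Set.ofList ing))) d).contains a = true)
    ↔ (d.contains a = true ∨ a ∈ als) := by
  intro als
  induction als with
  | nil => intro d a; simp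
  | cons k als ih =>
    intro d a
    rw [List.foldl_cons]
    have hc1 : (if !d.contains k then d.insert k (PySem.Set.ofList ing)
        else d.modify k PySem.Set.empty (fun s => PySem.Set.inter s (PySem.Set.ofList ing))).contains a
        = (a == k || d.contains a) := by
      by_cases hc : d.contains k = true
      · rw [if_neg (by simp [hc])]
        exact PySem.Dict.contains_modify _ _ _ _ _
      · rw [if_pos (by simp [hc])]
        exact PySem.Dict.contains_insert _ _ _ _
    rw [ih, hc1, List.mem_cons]
    by_cases hak : a = k <;> simp [hak]


theorem matchfold_mem :
    ∀ (L : List (List String × List String)) (d : PySem.Dict String (PySem.Set String)) (a f : String),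
    ((L.foldl (fun pf pr =>
        pr.2.foldl (fun pf k =>
          if !pf.contains k then pf.insert k (PySem.Set.ofList pr.1)
          else pf.modify k PySem.Set.empty (fun s => PySem.Set.inter s (PySem.Set.ofList pr.1))) pf) d).contains a = true ∧
     f ∈ (L.foldl (fun pf pr =>
        pr.2.foldl (fun pf k =>
          if !pf.contains k then pf.insert k (PySem.Set.ofList pr.1)
          else pf.modify k PySem.Set.empty (fun s => PySem.Set.inter s (PySem.Set.ofList pr.1))) pf) d).getD a [])
    ↔ (((d.contains a = true ∧ f ∈ d.getD a []) ∨ (d.contains a = false ∧ ∃ pr ∈ L, a ∈ pr.2)) ∧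
       (∀ pr ∈ L, a ∈ pr.2 → f ∈ pr.1)) := by
  intro L
  induction L with
  | nil => simp
  | cons pr rest ih =>
    intro d a f
    rw [List.foldl_cons, ih, alfold_mem pr.1 pr.2 d a f]
    have hcontf := alfold_contains pr.1 pr.2 d a
    have hcontf' : ((pr.2.foldl (fun pf k =>
        if !pf.contains k then pf.insert k (PySem.Set.ofList pr.1)
        else pf.modify k PySem.Set.empty (fun s => PySem.Set.inter s (PySem.Set.ofList pr.1))) d).contains a = false)
        ↔ (d.contains a = false ∧ a ∉ pr.2) := by
      constructor
      · intro h
        have hnt : ¬ (d.contains a = true ∨ a ∈ pr.2) := by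
          intro hh
          rw [hcontf.mpr hh] at h
          exact absurd h (by simp)
        have h1 := not_or.mp hnt
        exact ⟨by simpa using h1.1, h1.2⟩
      · rintro ⟨h1, h2⟩
        rcases Bool.eq_false_or_eq_true ((pr.2.foldl (fun pf k =>
            if !pf.contains k then pf.insert k (PySem.Set.ofList pr.1)
            else pf.modify k PySem.Set.empty (fun s => PySem.Set.inter s (PySem.Set.ofList pr.1))) d).contains a) with hb | hb
        · rcases hcontf.mp hb with hx | hx
          · rw [h1] at hx; exact absurd hx (by simp)
          · exact absurd hx h2
        · exact hb
    rw [hcontf']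
    constructor
    · rintro ⟨⟨h1 | ⟨h1a, h1b⟩, h3⟩ | ⟨⟨hcf, hnm⟩, hex⟩, h4⟩
      · exact ⟨Or.inl h1, by
          intro q hq haq
          rcases List.mem_cons.mp hq with rfl | hq'
          · exact h3 haq
          · exact h4 q hq' haq⟩
      · exact ⟨Or.inr ⟨h1a, ⟨pr, by simp, h1b⟩⟩, by
          intro q hq haq
          rcases List.mem_cons.mp hq with rfl | hq'
          · exact h3 haq
          · exact h4 q hq' haq⟩
      · refine ⟨Or.inr ⟨hcf, ?_⟩, ?_⟩
        · obtain ⟨q, hq, haq⟩ := hex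
          exact ⟨q, by simp [hq], haq⟩
        · intro q hq haq
          rcases List.mem_cons.mp hq with rfl | hq'
          · exact absurd haq hnm
          · exact h4 q hq' haq
    · rintro ⟨h1 | ⟨h1, q, hq, haq⟩, h2⟩
      · exact ⟨Or.inl ⟨Or.inl h1, fun hm => h2 pr (by simp) hm⟩,
          fun q hq haq => h2 q (by simp [hq]) haq⟩
      · by_cases hm : a ∈ pr.2
        · exact ⟨Or.inl ⟨Or.inr ⟨h1, hm⟩, fun _ => h2 pr (by simp) hm⟩,
            fun q' hq' haq' => h2 q' (by simp [hq']) haq'⟩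
        · rcases List.mem_cons.mp hq with rfl | hq'
          · exact absurd haq hm
          · exact ⟨Or.inr ⟨⟨h1, hm⟩, ⟨q, hq', haq⟩⟩,
              fun q' hq'' haq' => h2 q' (by simp [hq'']) haq'⟩

theorem PAp_iff_spec (items : List (List String × List String)) (a f : String) :
    PAp (matchA items) a f ↔ SpecAF items a f := by
  unfold PAp SpecAF matchA
  rw [matchfold_mem items PySem.Dict.empty a f]
  simp [PySem.Dict.empty, PySem.Dict.contains]

-- ---- B side: characterization of the candidate table ----

theorem map_filter_singleton {β : Type} (b : β) (f : String) :
    ∀ (l : List String), l.Nodup →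
    (l.map (fun x => (x, b))).filter (fun p => p.1 == f) = if f ∈ l then [(f, b)] else [] := by
  intro l
  induction l with
  | nil => intro _; simp
  | cons x xs ih =>
    intro hnd
    rw [List.map_cons, List.filter_cons]
    by_cases hxf : x = f
    · subst hxf
      rw [if_pos (by simp)]
      have : x ∉ xs := (List.nodup_cons.mp hnd).1
      rw [ih (List.nodup_cons.mp hnd).2, if_neg this, if_pos (by simp)]
    · rw [if_neg (by simpa using hxf), ih (List.nodup_cons.mp hnd).2]
      by_cases hm : f ∈ xs
      · rw [if_pos hm, if_pos (by simp [hm])]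
      · rw [if_neg hm, if_neg (by
          simp only [List.mem_cons, hm, or_false]
          exact fun h => hxf h.symm)]

theorem byAl_getD (items : List (List String × List String)) (a : String) :
    (byAlB items).getD a []
      = (items.filter (fun pr => decide (a ∈ pr.2))).map (fun pr => PySem.Set.ofList pr.1) := by
  unfold byAlB
  have hstep : (fun (m : PySem.Dict String (List (PySem.Set String))) (pr : List String × List String) =>
        (PySem.List.dedup pr.2).foldl (fun m a => m.modify a [] (· ++ [PySem.Set.ofList pr.1])) m)
      = (fun m pr => ((PySem.List.dedup pr.2).map (fun a => (a, PySem.Set.ofList pr.1))).foldl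
          (fun m p => m.modify p.1 [] (· ++ [p.2])) m) := by
    funext m pr
    rw [List.foldl_map]
  rw [hstep, ← List.foldl_flatMap, PySem.Dict.getD_foldl_modify_append]
  rw [show (PySem.Dict.empty : PySem.Dict String (List (PySem.Set String))).getD a [] = [] by
    simp [pysem]]
  rw [List.nil_append]
  induction items with
  | nil => simp
  | cons pr rest ih =>
    rw [List.flatMap_cons, List.filter_append, List.map_append, ih]
    rw [map_filter_singleton (PySem.Set.ofList pr.1) a (PySem.List.dedup pr.2) (PySem.List.nodup_dedup pr.2)]
    rw [List.filter_cons]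
    by_cases hm : a ∈ pr.2
    · rw [if_pos ((PySem.List.mem_dedup pr.2 a).mpr hm), if_pos (by simpa using hm)]
      simp
    · rw [if_neg (fun h => hm ((PySem.List.mem_dedup pr.2 a).mp h)), if_neg (by simpa using hm)]
      simp

theorem byAl_contains (items : List (List String × List String)) (a : String) :
    (byAlB items).contains a = true ↔ ∃ pr ∈ items, a ∈ pr.2 := by
  unfold byAlB
  rw [PySem.Dict.contains_iff_mem_keys]
  generalize hD : (PySem.Dict.empty : PySem.Dict String (List (PySem.Set String))) = d0
  have h0 : a ∈ d0.keys ↔ False := by rw [← hD]; simp [pysem]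
  rw [show (∃ pr ∈ items, a ∈ pr.2) ↔ (a ∈ d0.keys ∨ ∃ pr ∈ items, a ∈ pr.2) by rw [h0]; tauto]
  clear hD h0
  induction items generalizing d0 with
  | nil => simp
  | cons pr rest ih =>
    rw [List.foldl_cons]
    refine Iff.trans (ih _) ?_
    rw [PySem.Dict.keys_foldl_modify (f := fun _ _ => (· ++ [PySem.Set.ofList pr.1])),
      PySem.Set.mem_update, PySem.List.mem_dedup]
    constructor
    · rintro ((h | h) | ⟨q, hq, haq⟩)
      · exact Or.inl h
      · exact Or.inr ⟨pr, by simp, h⟩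
      · exact Or.inr ⟨q, by simp [hq], haq⟩
    · rintro (h | ⟨q, hq, haq⟩)
      · exact Or.inl (Or.inl h)
      · rcases List.mem_cons.mp hq with rfl | hq'
        · exact Or.inl (Or.inr haq)
        · exact Or.inr ⟨q, hq', haq⟩

theorem byAl_keys_nodup (items : List (List String × List String)) : (byAlB items).keys.Nodup := by
  unfold byAlB
  generalize hD : (PySem.Dict.empty : PySem.Dict String (List (PySem.Set String))) = d0
  have h0 : d0.keys.Nodup := by rw [← hD]; simp [pysem]
  clear hD
  induction items generalizing d0 with
  | nil => exact h0
  | cons pr rest ih =>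
    rw [List.foldl_cons]
    refine ih _ ?_
    rw [PySem.Dict.keys_foldl_modify (f := fun _ _ => (· ++ [PySem.Set.ofList pr.1]))]
    exact PySem.Set.nodup_update _ _ h0

theorem candB_keys (items : List (List String × List String)) :
    (candB items).keys = (byAlB items).keys := by
  show ((byAlB items).items.map (fun pr =>
      (pr.1, PySem.Set.ofList ((pr.2.headD []).filter (fun f => pr.2.all (fun l => l.contains f)))))).map
        (fun p => p.1)
    = (byAlB items).items.map (fun p => p.1)
  rw [List.map_map]
  rfl

theorem candB_nodups (items : List (List String × List String)) :
    (candB items).keys.Nodup ∧ ∀ v ∈ (candB items).values, v.Nodup := by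
  constructor
  · rw [candB_keys]
    exact byAl_keys_nodup items
  · intro v hv
    rcases List.mem_map.mp hv with ⟨p, hp, rfl⟩
    rcases List.mem_map.mp hp with ⟨pr, hpr, rfl⟩
    exact PySem.Set.nodup_ofList _

theorem candB_getD_mem (items : List (List String × List String)) (a f : String) :
    f ∈ (candB items).getD a [] ↔ SpecAF items a f := by
  by_cases hc : (byAlB items).contains a = true
  · have hsome : ((byAlB items).get? a).isSome := by
      rw [← PySem.Dict.contains_eq_isSome_get?, hc]
    obtain ⟨L, hL⟩ := Option.isSome_iff_exists.mp hsome
    have hmemB : (a, L) ∈ (byAlB items).items := PySem.Dict.mem_items_of_get?_eq_some _ hL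
    have hLval : L = (items.filter (fun pr => decide (a ∈ pr.2))).map (fun pr => PySem.Set.ofList pr.1) := by
      rw [← byAl_getD items a]
      exact (PySem.Dict.getD_of_get?_eq_some _ _ hL).symm
    have hmemC : (a, PySem.Set.ofList ((L.headD []).filter (fun f => L.all (fun l => l.contains f))))
        ∈ (candB items).items := by
      show _ ∈ (byAlB items).items.map _
      exact List.mem_map.mpr ⟨(a, L), hmemB, rfl⟩
    have hgd := PySem.Dict.getD_of_mem_items _ hmemC (candB_nodups items).1 []
    rw [hgd, PySem.Set.mem_ofList, List.mem_filter]
    obtain ⟨pr0, hpr0, ha0⟩ := (byAl_contains items a).mp hc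
    have hLne : L ≠ [] := by
      rw [hLval]
      intro hnil
      have hmemf : pr0 ∈ items.filter (fun pr => decide (a ∈ pr.2)) :=
        List.mem_filter.mpr ⟨hpr0, decide_eq_true ha0⟩
      rw [List.map_eq_nil_iff.mp hnil] at hmemf
      exact absurd hmemf List.not_mem_nil
    have hheadmem : L.headD [] ∈ L := by
      match L, hLne with
      | l :: ls, _ => simp
    have hmemL : ∀ l, l ∈ L ↔ ∃ pr ∈ items, a ∈ pr.2 ∧ PySem.Set.ofList pr.1 = l := by
      intro l
      rw [hLval]
      constructor
      · intro h
        rcases List.mem_map.mp h with ⟨pr, hpr, rfl⟩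
        have h1 := List.mem_filter.mp hpr
        exact ⟨pr, h1.1, of_decide_eq_true h1.2, rfl⟩
      · rintro ⟨pr, hpr, hapr, rfl⟩
        exact List.mem_map.mpr ⟨pr, List.mem_filter.mpr ⟨hpr, decide_eq_true hapr⟩, rfl⟩
    constructor
    · rintro ⟨hhead, hall⟩
      refine ⟨⟨pr0, hpr0, ha0⟩, ?_⟩
      intro pr hpr hapr
      have hlm : PySem.Set.ofList pr.1 ∈ L := (hmemL _).mpr ⟨pr, hpr, hapr, rfl⟩
      have := List.all_eq_true.mp hall _ hlm
      rw [show (PySem.Set.ofList pr.1).contains f = ((PySem.Set.ofList pr.1).contains f) from rfl] at this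
      have hf1 : f ∈ PySem.Set.ofList pr.1 := by simpa using this
      exact (PySem.Set.mem_ofList _ _).mp hf1
    · rintro ⟨-, hall⟩
      obtain ⟨prh, hprh, haprh, hprh1⟩ := (hmemL (L.headD [])).mp hheadmem
      refine ⟨by
        rw [← hprh1, PySem.Set.mem_ofList]
        exact hall prh hprh haprh, ?_⟩
      rw [List.all_eq_true]
      intro l hl
      obtain ⟨pr, hpr, hapr, rfl⟩ := (hmemL l).mp hl
      have : f ∈ PySem.Set.ofList pr.1 := (PySem.Set.mem_ofList _ _).mpr (hall pr hpr hapr)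
      simpa using this
  · have hcf : (candB items).contains a = false := by
      rcases Bool.eq_false_or_eq_true ((candB items).contains a) with hh | hh
      · exfalso
        apply hc
        rw [PySem.Dict.contains_iff_mem_keys] at hh ⊢
        rw [candB_keys] at hh
        exact hh
      · exact hh
    rw [PySem.Dict.getD_of_not_contains _ _ hcf]
    constructor
    · intro h
      exact absurd h List.not_mem_nil
    · rintro ⟨⟨pr, hpr, hapr⟩, -⟩
      exact absurd ((byAl_contains items a).mpr ⟨pr, hpr, hapr⟩) (by simp [hc])

theorem candB_contains_of (items : List (List String × List String)) (a : String)
    (h : ∃ pr ∈ items, a ∈ pr.2) : (candB items).contains a = true := by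
  rw [PySem.Dict.contains_iff_mem_keys, candB_keys]
  exact (PySem.Dict.contains_iff_mem_keys _ _).mp ((byAl_contains items a).mpr h)

def PBp (items : List (List String × List String)) (a f : String) : Prop :=
  (candB items).contains a = true ∧ f ∈ (candB items).getD a []

theorem PBp_iff_PAp (items : List (List String × List String)) (a f : String) :
    PBp items a f ↔ PAp (matchA items) a f := by
  rw [PAp_iff_spec]
  constructor
  · rintro ⟨-, hm⟩
    exact (candB_getD_mem items a f).mp hm
  · intro hs
    exact ⟨candB_contains_of items a hs.1, (candB_getD_mem items a f).mpr hs⟩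

-- ---- B side: worklist loop invariant ----
theorem containingB_getD (cand : PySem.Dict String (PySem.Set String))
    (hvnd : ∀ pr ∈ cand.items, pr.2.Nodup) (f : String) :
    (containingB cand).getD f []
      = (cand.items.filter (fun pr => decide (f ∈ pr.2))).map (fun pr => pr.1) := by
  unfold containingB
  have hstep : (fun (m : PySem.Dict String (List String)) (pr : String × PySem.Set String) =>
        pr.2.foldl (fun m f => m.modify f [] (· ++ [pr.1])) m)
      = (fun m pr => (pr.2.map (fun x => (x, pr.1))).foldl
          (fun m p => m.modify p.1 [] (· ++ [p.2])) m) := by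
    funext m pr
    rw [List.foldl_map]
  rw [hstep, ← List.foldl_flatMap]
  rw [PySem.Dict.getD_foldl_modify_append]
  rw [show (PySem.Dict.empty : PySem.Dict String (List String)).getD f [] = [] by simp [pysem]]
  rw [List.nil_append]
  have main : ∀ (M : List (String × PySem.Set String)), (∀ pr ∈ M, pr.2.Nodup) →
      ((M.flatMap (fun pr => pr.2.map (fun x => (x, pr.1)))).filter (fun p => p.1 == f)).map (fun p => p.2)
        = (M.filter (fun pr => decide (f ∈ pr.2))).map (fun pr => pr.1) := by
    intro M
    induction M with
    | nil => intro _; simp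
    | cons pr rest ih =>
      intro hnd
      have hvnd' : ∀ q ∈ rest, q.2.Nodup := fun q hq => hnd q (by simp [hq])
      rw [List.flatMap_cons, List.filter_append, List.map_append, ih hvnd']
      rw [map_filter_singleton pr.1 f pr.2 (hnd pr (by simp))]
      rw [List.filter_cons]
      by_cases hm : f ∈ pr.2
      · rw [if_pos hm, if_pos (by simpa using hm)]
        simp
      · rw [if_neg hm, if_neg (by simpa using hm)]
        simp
  exact main cand.items hvnd

theorem foldcnt (done' : PySem.Set String) :
    ∀ (bs : List String), bs.Nodup →
    ∀ (cnt : PySem.Dict String Int) (qq : List String),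
    (∀ b, (bs.foldl (fun (st : PySem.Dict String Int × List String) b =>
        if done'.contains b then st
        else
          let c := st.1.getD b 0 - 1
          (st.1.insert b c, if c == 1 then st.2 ++ [b] else st.2)) (cnt, qq)).1.getD b 0
      = if b ∈ bs ∧ b ∉ done' then cnt.getD b 0 - 1 else cnt.getD b 0) ∧
    (∀ b ∈ qq, b ∈ (bs.foldl (fun (st : PySem.Dict String Int × List String) b =>
        if done'.contains b then st
        else
          let c := st.1.getD b 0 - 1
          (st.1.insert b c, if c == 1 then st.2 ++ [b] else st.2)) (cnt, qq)).2) ∧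
    (∀ b ∈ bs, b ∉ done' → cnt.getD b 0 - 1 = 1 →
      b ∈ (bs.foldl (fun (st : PySem.Dict String Int × List String) b =>
        if done'.contains b then st
        else
          let c := st.1.getD b 0 - 1
          (st.1.insert b c, if c == 1 then st.2 ++ [b] else st.2)) (cnt, qq)).2) ∧
    (∀ b ∈ (bs.foldl (fun (st : PySem.Dict String Int × List String) b =>
        if done'.contains b then st
        else
          let c := st.1.getD b 0 - 1
          (st.1.insert b c, if c == 1 then st.2 ++ [b] else st.2)) (cnt, qq)).2, b ∈ qq ∨ b ∈ bs) ∧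
    ((bs.foldl (fun (st : PySem.Dict String Int × List String) b =>
        if done'.contains b then st
        else
          let c := st.1.getD b 0 - 1
          (st.1.insert b c, if c == 1 then st.2 ++ [b] else st.2)) (cnt, qq)).2.length ≤ qq.length + bs.length) := by
  intro bs
  induction bs with
  | nil => intro _ cnt qq; exact ⟨by intro b; simp, fun b h => h, by intro b h; simp at h, fun b h => Or.inl h, by simp⟩
  | cons b0 bs ih =>
    intro hnd cnt qq
    have hnd' := (List.nodup_cons.mp hnd).2
    have hb0 : b0 ∉ bs := (List.nodup_cons.mp hnd).1
    rw [List.foldl_cons]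
    by_cases hd : done'.contains b0 = true
    · rw [if_pos hd]
      obtain ⟨g1, g2, g3, g4, g5⟩ := ih hnd' cnt qq
      have hdm : b0 ∈ done' := (PySem.Set.contains_iff done' b0).mp hd
      refine ⟨?_, g2, ?_, ?_, g5.trans (by simp only [List.length_cons]; omega)⟩
      · intro b
        rw [g1 b]
        by_cases hbb : b = b0
        · subst hbb
          simp [hb0, hdm]
        · simp [List.mem_cons, hbb]
      · intro b hb hbd hc
        rcases List.mem_cons.mp hb with rfl | hb'
        · exact absurd hdm hbd
        · exact g3 b hb' hbd hc
      · intro b hb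
        rcases g4 b hb with h | h
        · exact Or.inl h
        · exact Or.inr (by simp [h])
    · have hdf : done'.contains b0 = false := by simpa using hd
      have hnm : b0 ∉ done' := fun hm =>
        absurd ((PySem.Set.contains_iff done' b0).mpr hm) (by rw [hdf]; simp)
      rw [if_neg (fun h => hnm ((PySem.Set.contains_iff done' b0).mp h))]
      simp only []
      set c := cnt.getD b0 0 - 1 with hc
      set cnt1 := cnt.insert b0 c with hcnt1
      set qq1 := if c == 1 then qq ++ [b0] else qq with hqq1
      obtain ⟨g1, g2, g3, g4, g5⟩ := ih hnd' cnt1 qq1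
      have hq1len : qq1.length ≤ qq.length + 1 := by
        rw [hqq1]; split <;> simp
      have hqsub : ∀ b ∈ qq, b ∈ qq1 := by
        intro b hb; rw [hqq1]; split <;> simp [hb]
      have hcnt1getD : ∀ b, cnt1.getD b 0 = if b = b0 then cnt.getD b0 0 - 1 else cnt.getD b 0 := by
        intro b
        rw [hcnt1, hc, PySem.Dict.getD_insert]
      refine ⟨?_, ?_, ?_, ?_, g5.trans (by simp only [List.length_cons]; omega)⟩
      · intro b
        rw [g1 b, hcnt1getD b]
        by_cases hbb : b = b0
        · subst hbb
          simp [hb0, hnm]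
        · simp [List.mem_cons, hbb]
      · intro b hb
        exact g2 b (hqsub b hb)
      · intro b hb hbd hcc
        rcases List.mem_cons.mp hb with rfl | hb'
        · refine g2 b ?_
          rw [hqq1, if_pos (by rw [← hc] at hcc; simp [hcc])]
          simp
        · refine g3 b hb' hbd ?_
          rw [hcnt1getD b, if_neg (fun h => hb0 (by rw [← h]; exact hb'))]
          exact hcc
      · intro b hb
        rcases g4 b hb with h | h
        · rw [hqq1] at h
          by_cases hcc : (c == 1) = true
          · rw [if_pos hcc] at h
            rcases List.mem_append.mp h with h' | h'
            · exact Or.inl h'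
            · simp at h'
              exact Or.inr (by simp [h'])
          · rw [if_neg hcc] at h
            exact Or.inl h
        · exact Or.inr (by simp [h])

def InvB (cand : PySem.Dict String (PySem.Set String)) (q : List String)
    (done res : PySem.Set String) (cnt : PySem.Dict String Int) : Prop :=
  (∀ b ∈ done, ∃ s, (b, s) ∈ cand.items ∧ ∀ x ∈ s, x ∈ res) ∧
  (∀ x ∈ res, Deriv (fun a f => cand.contains a = true ∧ f ∈ cand.getD a []) x) ∧
  (∀ b s, (b, s) ∈ cand.items → b ∉ done →
      cnt.getD b 0 = ((s.filter (fun x => !res.contains x)).length : Int)) ∧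
  (∀ b s, (b, s) ∈ cand.items → b ∉ done →
      (s.filter (fun x => !res.contains x)).length = 1 → b ∈ q) ∧
  (∀ b ∈ q, b ∈ cand.keys)

theorem contains_add_eq (s : PySem.Set String) (a b : String) :
    (PySem.Set.add s a).contains b = (s.contains b || (b == a)) := by
  by_cases h : b ∈ PySem.Set.add s a
  · rw [(PySem.Set.contains_iff _ _).mpr h]
    rcases (PySem.Set.mem_add _ _ _).mp h with h' | h'
    · rw [(PySem.Set.contains_iff _ _).mpr h']; rfl
    · subst h'
      simp
  · have h1 : b ∉ s := fun hm => h ((PySem.Set.mem_add _ _ _).mpr (Or.inl hm))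
    have h2 : ¬ b = a := fun hm => h ((PySem.Set.mem_add _ _ _).mpr (Or.inr hm))
    have e1 : (PySem.Set.add s a).contains b = false := by
      rcases Bool.eq_false_or_eq_true ((PySem.Set.add s a).contains b) with hh | hh
      · exact absurd ((PySem.Set.contains_iff _ _).mp hh) h
      · exact hh
    have e2 : s.contains b = false := by
      rcases Bool.eq_false_or_eq_true (s.contains b) with hh | hh
      · exact absurd ((PySem.Set.contains_iff _ _).mp hh) h1
      · exact hh
    rw [e1, e2]
    simp [h2]

theorem mem_of_contains_false {s : PySem.Set String} {b : String}
    (h : s.contains b = false) : b ∉ s := fun hm =>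
  absurd ((PySem.Set.contains_iff _ _).mpr hm) (by rw [h]; simp)

theorem contains_false_of_not_mem {s : PySem.Set String} {b : String}
    (h : b ∉ s) : s.contains b = false := by
  rcases Bool.eq_false_or_eq_true (s.contains b) with hh | hh
  · exact absurd ((PySem.Set.contains_iff _ _).mp hh) h
  · exact hh

-- a resolved food leaves the unresolved-filter of every candidate set; nothing else changes
theorem filter_res_add (s : PySem.Set String) (res : PySem.Set String) (f0 : String) :
    s.filter (fun x => !(PySem.Set.add res f0).contains x)
      = (s.filter (fun x => !res.contains x)).filter (fun x => !(x == f0)) := by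
  rw [List.filter_filter]
  apply List.filter_congr
  intro x _
  rw [contains_add_eq]
  cases res.contains x <;> cases hxf : (x == f0) <;> simp

theorem length_filter_ne (l : List String) (f0 : String) (hnd : l.Nodup) (hm : f0 ∈ l) :
    (l.filter (fun x => !(x == f0))).length = l.length - 1 := by
  rw [show (fun (x : String) => !(x == f0)) = (fun x => x != f0) from rfl,
    ← List.Nodup.erase_eq_filter hnd, List.length_erase_of_mem hm]

theorem loopB_SC (cand : PySem.Dict String (PySem.Set String))
    (hk : cand.keys.Nodup) (hv : ∀ pr ∈ cand.items, pr.2.Nodup) :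
    ∀ (fuel : Nat) (q : List String) (done res : PySem.Set String) (cnt : PySem.Dict String Int),
    InvB cand q done res cnt →
    (cand.keys.filter (fun b => !done.contains b)).length * (cand.items.length + 1) + q.length < fuel →
    (∀ x ∈ loopB cand (containingB cand) fuel q done res cnt,
        Deriv (fun a f => cand.contains a = true ∧ f ∈ cand.getD a []) x) ∧
    (∀ a f, cand.contains a = true → f ∈ cand.getD a [] →
      (∀ g ∈ cand.getD a [], g ≠ f → g ∈ loopB cand (containingB cand) fuel q done res cnt) →
      f ∈ loopB cand (containingB cand) fuel q done res cnt) := by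
  have hgetD_items : ∀ {b : String} {s : PySem.Set String}, (b, s) ∈ cand.items → cand.getD b [] = s :=
    fun h => PySem.Dict.getD_of_mem_items _ h hk []
  have hmem_items : ∀ {b : String}, cand.contains b = true → (b, cand.getD b []) ∈ cand.items := by
    intro b hc
    have hsome : (cand.get? b).isSome := by rw [← PySem.Dict.contains_eq_isSome_get?, hc]
    obtain ⟨v, hvv⟩ := Option.isSome_iff_exists.mp hsome
    rw [PySem.Dict.getD_of_get?_eq_some _ _ hvv]
    exact PySem.Dict.mem_items_of_get?_eq_some _ hvv
  have hcont_of_mem : ∀ {b : String} {s : PySem.Set String}, (b, s) ∈ cand.items → cand.contains b = true := by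
    intro b s h
    rw [PySem.Dict.contains_iff_mem_keys]
    exact List.mem_map.mpr ⟨(b, s), h, rfl⟩
  have hcontB : ∀ (f0 b : String), b ∈ (containingB cand).getD f0 [] ↔
      ∃ s, (b, s) ∈ cand.items ∧ f0 ∈ s := by
    intro f0 b
    rw [containingB_getD cand hv f0]
    constructor
    · intro h
      rcases List.mem_map.mp h with ⟨pr, hpr, rfl⟩
      have h1 := List.mem_filter.mp hpr
      exact ⟨pr.2, h1.1, of_decide_eq_true h1.2⟩
    · rintro ⟨s, hs, hf⟩
      exact List.mem_map.mpr ⟨(b, s), List.mem_filter.mpr ⟨hs, decide_eq_true hf⟩, rfl⟩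
  have hcontBnd : ∀ f0 : String, ((containingB cand).getD f0 []).Nodup := by
    intro f0
    rw [containingB_getD cand hv f0]
    have : ((cand.items.filter (fun pr => decide (f0 ∈ pr.2))).map (fun pr => pr.1)).Sublist
        (cand.items.map (fun pr => pr.1)) := List.Sublist.map _ List.filter_sublist
    exact this.nodup hk
  have hcontBlen : ∀ f0 : String, ((containingB cand).getD f0 []).length ≤ cand.items.length := by
    intro f0
    rw [containingB_getD cand hv f0, List.length_map]
    exact List.length_filter_le _ _
  intro fuel
  induction fuel with
  | zero => intro q done res cnt _ h; exact absurd h (Nat.not_lt_zero _)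
  | succ f ih =>
    intro q done res cnt hI hfuel
    obtain ⟨i1, i2, i3, i4, i5⟩ := hI
    match q with
    | [] =>
      have hL : loopB cand (containingB cand) (f + 1) [] done res cnt = res := rfl
      rw [hL]
      refine ⟨i2, ?_⟩
      intro a g hca hgm hothers
      have hsa : (a, cand.getD a []) ∈ cand.items := hmem_items hca
      by_cases hadone : a ∈ done
      · obtain ⟨s', hmem, hsub⟩ := i1 a hadone
        have : cand.getD a [] = s' := hgetD_items hmem
        exact hsub g (this ▸ hgm)
      · set s := cand.getD a [] with hs
        have hflt : ∀ x ∈ s.filter (fun x => !res.contains x), x = g := by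
          intro x hx
          obtain ⟨hx1, hx2⟩ := List.mem_filter.mp hx
          by_contra hne
          have := hothers x hx1 hne
          exact mem_of_contains_false (by simpa using hx2) this
        have hnds : s.Nodup := hv (a, s) hsa
        have hlen : (s.filter (fun x => !res.contains x)).length ≠ 1 := by
          intro h1
          exact absurd (i4 a s hsa hadone h1) (List.not_mem_nil)
        have hle1 : (s.filter (fun x => !res.contains x)).length ≤ 1 := by
          match hh : s.filter (fun x => !res.contains x) with
          | [] => simp
          | [y] => simp
          | y :: z :: t =>
            have hy : y = g := hflt y (by rw [hh]; simp)
            have hz : z = g := hflt z (by rw [hh]; simp)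
            have hnd' : (y :: z :: t).Nodup := hh ▸ (List.Nodup.filter _ hnds)
            exact absurd (show y ∈ z :: t by simp [hy, hz.symm])
              (List.nodup_cons.mp hnd').1
        have hnil : s.filter (fun x => !res.contains x) = [] :=
          List.length_eq_zero_iff.mp (by omega)
        by_contra hgres
        have : g ∈ s.filter (fun x => !res.contains x) :=
          List.mem_filter.mpr ⟨hgm, by rw [contains_false_of_not_mem hgres]; rfl⟩
        rw [hnil] at this
        exact absurd this List.not_mem_nil
    | a :: rest =>
      by_cases hda : done.contains a = true
      · have hL : loopB cand (containingB cand) (f + 1) (a :: rest) done res cnt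
            = loopB cand (containingB cand) f rest done res cnt := by
          show (if done.contains a then _ else _) = _
          rw [if_pos hda]
        rw [hL]
        refine ih rest done res cnt ⟨i1, i2, i3, ?_, fun b hb => i5 b (by simp [hb])⟩ (by
          simp only [List.length_cons] at hfuel
          omega)
        intro b s hbs hbd hlen
        have hmem := i4 b s hbs hbd hlen
        rcases List.mem_cons.mp hmem with rfl | h
        · exact absurd ((PySem.Set.contains_iff _ _).mp hda) hbd
        · exact h
      · have hdaf : done.contains a = false := by simpa using hda
        set rem := (cand.getD a []).filter (fun x => !res.contains x) with hrem
        by_cases hr1 : (rem.length == 1) = true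
        · -- resolve a: rem = [f0]
          obtain ⟨f0, hf0⟩ := List.length_eq_one_iff.mp (by simpa using hr1)
          have hhead : rem.headD "" = f0 := by rw [hf0]; rfl
          have hL : loopB cand (containingB cand) (f + 1) (a :: rest) done res cnt
              = loopB cand (containingB cand) f
                  (((containingB cand).getD (rem.headD "") []).foldl
                    (fun (st : PySem.Dict String Int × List String) b =>
                      if (PySem.Set.add done a).contains b then st
                      else
                        let c := st.1.getD b 0 - 1
                        (st.1.insert b c, if c == 1 then st.2 ++ [b] else st.2)) (cnt, rest)).2
                  (PySem.Set.add done a)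
                  (PySem.Set.add res (rem.headD ""))
                  (((containingB cand).getD (rem.headD "") []).foldl
                    (fun (st : PySem.Dict String Int × List String) b =>
                      if (PySem.Set.add done a).contains b then st
                      else
                        let c := st.1.getD b 0 - 1
                        (st.1.insert b c, if c == 1 then st.2 ++ [b] else st.2)) (cnt, rest)).1 := by
            show (if done.contains a then _ else _) = _
            rw [if_neg (fun h => mem_of_contains_false hdaf ((PySem.Set.contains_iff _ _).mp h))]
            show (if rem.length == 1 then _ else _) = _
            rw [if_pos hr1]
          rw [hL, hhead]
          have ham : a ∈ cand.keys := i5 a (by simp)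
          have hca : cand.contains a = true := (PySem.Dict.contains_iff_mem_keys _ _).mpr ham
          have hsa : (a, cand.getD a []) ∈ cand.items := hmem_items hca
          set s := cand.getD a [] with hsdef
          have hf0s : f0 ∈ s ∧ f0 ∉ res := by
            have : f0 ∈ rem := by rw [hf0]; simp
            obtain ⟨h1, h2⟩ := List.mem_filter.mp this
            exact ⟨h1, mem_of_contains_false (by simpa using h2)⟩
          obtain ⟨g1, g2, g3, g4, g5⟩ := foldcnt (PySem.Set.add done a)
            ((containingB cand).getD f0 []) (hcontBnd f0) cnt rest
          have hanotdone : a ∉ done := mem_of_contains_false hdaf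
          have hadone' : a ∈ PySem.Set.add done a := (PySem.Set.mem_add _ _ _).mpr (Or.inr rfl)
          -- new invariant
          have hI' : InvB cand
              (((containingB cand).getD f0 []).foldl
                (fun (st : PySem.Dict String Int × List String) b =>
                  if (PySem.Set.add done a).contains b then st
                  else
                    let c := st.1.getD b 0 - 1
                    (st.1.insert b c, if c == 1 then st.2 ++ [b] else st.2)) (cnt, rest)).2
              (PySem.Set.add done a) (PySem.Set.add res f0)
              (((containingB cand).getD f0 []).foldl
                (fun (st : PySem.Dict String Int × List String) b =>
                  if (PySem.Set.add done a).contains b then st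
                  else
                    let c := st.1.getD b 0 - 1
                    (st.1.insert b c, if c == 1 then st.2 ++ [b] else st.2)) (cnt, rest)).1 := by
            refine ⟨?_, ?_, ?_, ?_, ?_⟩
            · intro b hb
              rcases (PySem.Set.mem_add _ _ _).mp hb with hb' | rfl
              · obtain ⟨s', hm, hsub⟩ := i1 b hb'
                exact ⟨s', hm, fun x hx => (PySem.Set.mem_add _ _ _).mpr (Or.inl (hsub x hx))⟩
              · refine ⟨s, hsa, ?_⟩
                intro x hx
                by_cases hxr : x ∈ res
                · exact (PySem.Set.mem_add _ _ _).mpr (Or.inl hxr)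
                · have : x ∈ rem := List.mem_filter.mpr ⟨hx, by rw [contains_false_of_not_mem hxr]; rfl⟩
                  rw [hf0] at this
                  simp at this
                  exact (PySem.Set.mem_add _ _ _).mpr (Or.inr this)
            · intro x hx
              rcases (PySem.Set.mem_add _ _ _).mp hx with hx' | rfl
              · exact i2 x hx'
              · refine Deriv.step a x ⟨hca, hf0s.1⟩ ?_
                intro g hPg hne
                by_cases hgr : g ∈ res
                · exact i2 g hgr
                · have : g ∈ rem := List.mem_filter.mpr ⟨hPg.2, by rw [contains_false_of_not_mem hgr]; rfl⟩
                  rw [hf0] at this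
                  simp at this
                  exact absurd this hne
            · intro b s' hbs' hbd'
              have hbdone : b ∉ done := fun h => hbd' ((PySem.Set.mem_add _ _ _).mpr (Or.inl h))
              have hba : b ≠ a := fun h => hbd' (h ▸ hadone')
              have hold := i3 b s' hbs' hbdone
              rw [g1 b]
              have hbbs : b ∈ (containingB cand).getD f0 [] ↔ f0 ∈ s' := by
                rw [hcontB f0 b]
                constructor
                · rintro ⟨s'', hm, hf⟩
                  have : cand.getD b [] = s'' := hgetD_items hm
                  have h2 : cand.getD b [] = s' := hgetD_items hbs'
                  rw [this] at h2
                  exact h2 ▸ hf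
                · intro hf
                  exact ⟨s', hbs', hf⟩
              have hnds' : s'.Nodup := hv (b, s') hbs'
              by_cases hf0in : f0 ∈ s'
              · rw [if_pos ⟨hbbs.mpr hf0in, hbd'⟩, hold]
                rw [filter_res_add s' res f0]
                have hf0mem : f0 ∈ s'.filter (fun x => !res.contains x) :=
                  List.mem_filter.mpr ⟨hf0in, by rw [contains_false_of_not_mem hf0s.2]; rfl⟩
                rw [length_filter_ne _ _ (List.Nodup.filter _ hnds') hf0mem]
                have hpos : 1 ≤ (s'.filter (fun x => !res.contains x)).length :=
                  List.length_pos_of_mem hf0mem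
                push_cast [Nat.cast_sub hpos]
                ring
              · rw [if_neg (fun hcond => hf0in (hbbs.mp hcond.1)), hold]
                congr 1
                rw [filter_res_add s' res f0]
                have : ∀ x ∈ s'.filter (fun x => !res.contains x), (!(x == f0)) = true := by
                  intro x hx
                  have hxs : x ∈ s' := (List.mem_filter.mp hx).1
                  have : x ≠ f0 := fun h => hf0in (h ▸ hxs)
                  simp [this]
                rw [List.filter_eq_self.mpr this]
            · intro b s' hbs' hbd' hlen'
              have hbdone : b ∉ done := fun h => hbd' ((PySem.Set.mem_add _ _ _).mpr (Or.inl h))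
              have hba : b ≠ a := fun h => hbd' (h ▸ hadone')
              have hold := i3 b s' hbs' hbdone
              have hbbs : b ∈ (containingB cand).getD f0 [] ↔ f0 ∈ s' := by
                rw [hcontB f0 b]
                constructor
                · rintro ⟨s'', hm, hf⟩
                  have h1 : cand.getD b [] = s'' := hgetD_items hm
                  have h2 : cand.getD b [] = s' := hgetD_items hbs'
                  rw [h1] at h2
                  exact h2 ▸ hf
                · intro hf
                  exact ⟨s', hbs', hf⟩
              have hnds' : s'.Nodup := hv (b, s') hbs'
              by_cases hf0in : f0 ∈ s'
              · refine g3 b (hbbs.mpr hf0in) hbd' ?_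
                rw [hold]
                rw [filter_res_add s' res f0] at hlen'
                have hf0mem : f0 ∈ s'.filter (fun x => !res.contains x) :=
                  List.mem_filter.mpr ⟨hf0in, by rw [contains_false_of_not_mem hf0s.2]; rfl⟩
                rw [length_filter_ne _ _ (List.Nodup.filter _ hnds') hf0mem] at hlen'
                have hpos : 1 ≤ (s'.filter (fun x => !res.contains x)).length :=
                  List.length_pos_of_mem hf0mem
                omega
              · have heq : (s'.filter (fun x => !(PySem.Set.add res f0).contains x))
                    = s'.filter (fun x => !res.contains x) := by
                  rw [filter_res_add s' res f0]
                  have : ∀ x ∈ s'.filter (fun x => !res.contains x), (!(x == f0)) = true := by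
                    intro x hx
                    have hxs : x ∈ s' := (List.mem_filter.mp hx).1
                    have : x ≠ f0 := fun h => hf0in (h ▸ hxs)
                    simp [this]
                  rw [List.filter_eq_self.mpr this]
                rw [heq] at hlen'
                have hmem := i4 b s' hbs' hbdone hlen'
                rcases List.mem_cons.mp hmem with rfl | h
                · exact absurd rfl hba
                · exact g2 b h
            · intro b hb
              rcases g4 b hb with h | h
              · exact i5 b (by simp [h])
              · rcases (hcontB f0 b).mp h with ⟨s'', hm, _⟩
                exact List.mem_map.mpr ⟨(b, s''), hm, rfl⟩
          refine ih _ _ _ _ hI' ?_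
          -- measure decreases
          have hfilt' : (cand.keys.filter (fun b => !(PySem.Set.add done a).contains b))
              = (cand.keys.filter (fun b => !done.contains b)).filter (fun b => !(b == a)) := by
            rw [List.filter_filter]
            apply List.filter_congr
            intro b _
            rw [contains_add_eq]
            cases done.contains b <;> cases (b == a) <;> simp
          have hamem : a ∈ cand.keys.filter (fun b => !done.contains b) :=
            List.mem_filter.mpr ⟨ham, by rw [hdaf]; rfl⟩
          have hlen1 : (cand.keys.filter (fun b => !(PySem.Set.add done a).contains b)).length
              = (cand.keys.filter (fun b => !done.contains b)).length - 1 := by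
            rw [hfilt']
            exact length_filter_ne _ _ (List.Nodup.filter _ hk) hamem
          have hpos : 1 ≤ (cand.keys.filter (fun b => !done.contains b)).length :=
            List.length_pos_of_mem hamem
          have hqlen : (((containingB cand).getD f0 []).foldl
                (fun (st : PySem.Dict String Int × List String) b =>
                  if (PySem.Set.add done a).contains b then st
                  else
                    let c := st.1.getD b 0 - 1
                    (st.1.insert b c, if c == 1 then st.2 ++ [b] else st.2)) (cnt, rest)).2.length
              ≤ rest.length + cand.items.length := g5.trans (by
                have := hcontBlen f0
                omega)
          rw [hlen1]
          simp only [List.length_cons] at hfuel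
          -- (D-1)*(K+1) + q' < f  given  D*(K+1) + rest+1 < f+1, q' ≤ rest + K, D ≥ 1
          set D := (cand.keys.filter (fun b => !done.contains b)).length with hDdef
          set K := cand.items.length with hKdef
          obtain ⟨d, hDd⟩ : ∃ d, D = d + 1 := ⟨D - 1, by omega⟩
          rw [hDd] at hfuel ⊢
          have hsub : d + 1 - 1 = d := rfl
          rw [hsub]
          have hdist : (d + 1) * (K + 1) = d * (K + 1) + (K + 1) := by ring
          omega
        · -- skip: rem not a singleton
          have hL : loopB cand (containingB cand) (f + 1) (a :: rest) done res cnt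
              = loopB cand (containingB cand) f rest done res cnt := by
            show (if done.contains a then _ else _) = _
            rw [if_neg (fun h => mem_of_contains_false hdaf ((PySem.Set.contains_iff _ _).mp h))]
            show (if rem.length == 1 then _ else _) = _
            rw [if_neg hr1]
          rw [hL]
          refine ih rest done res cnt ⟨i1, i2, i3, ?_, fun b hb => i5 b (by simp [hb])⟩ (by
            simp only [List.length_cons] at hfuel
            omega)
          intro b s hbs hbd hlen
          have hmem := i4 b s hbs hbd hlen
          rcases List.mem_cons.mp hmem with rfl | h
          · have : cand.getD b [] = s := hgetD_items hbs
            rw [← this] at hlen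
            exact absurd (by rw [hrem] at hr1; simpa using hlen) (by
              intro hh
              exact hr1 (by rw [hrem]; simp [hh]))
          · exact h


theorem B_values_iff_deriv (items : List (List String × List String)) (x : String) :
    x ∈ loopB (candB items) (containingB (candB items))
        (((candB items).items.length + 1) * (candB items).items.length +
          (((candB items).items.filter (fun pr => pr.2.length == 1)).map (fun pr => pr.1)).length + 1)
        (((candB items).items.filter (fun pr => pr.2.length == 1)).map (fun pr => pr.1))
        PySem.Set.empty PySem.Set.empty
        (PySem.Dict.mk ((candB items).items.map (fun pr => (pr.1, (pr.2.length : Int)))))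
      ↔ Deriv (PAp (matchA items)) x := by
  obtain ⟨hk, hvv⟩ := candB_nodups items
  have hv : ∀ pr ∈ (candB items).items, pr.2.Nodup := fun pr hpr =>
    hvv pr.2 (List.mem_map.mpr ⟨pr, hpr, rfl⟩)
  set cand := candB items with hcand
  set q0 := (cand.items.filter (fun pr => pr.2.length == 1)).map (fun pr => pr.1) with hq0
  set cnt0 := PySem.Dict.mk (cand.items.map (fun pr => (pr.1, (pr.2.length : Int)))) with hcnt0
  have hcnt0keys : cnt0.keys = cand.keys := by
    rw [hcnt0]
    show (cand.items.map (fun pr => (pr.1, (pr.2.length : Int)))).map (fun p => p.1)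
        = cand.items.map (fun p => p.1)
    rw [List.map_map]
    rfl
  have hfiltall : ∀ s : PySem.Set String,
      s.filter (fun x => !(PySem.Set.empty : PySem.Set String).contains x) = s := by
    intro s
    exact List.filter_eq_self.mpr (fun x _ => rfl)
  have hInv : InvB cand q0 PySem.Set.empty PySem.Set.empty cnt0 := by
    refine ⟨?_, ?_, ?_, ?_, ?_⟩
    · intro b hb
      exact absurd hb List.not_mem_nil
    · intro x hx
      exact absurd hx List.not_mem_nil
    · intro b s hbs _
      have hmemc : (b, (s.length : Int)) ∈ cnt0.items := by
        rw [hcnt0]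
        exact List.mem_map.mpr ⟨(b, s), hbs, rfl⟩
      rw [PySem.Dict.getD_of_mem_items _ hmemc (by rw [hcnt0keys]; exact hk) 0, hfiltall s]
    · intro b s hbs _ hlen
      rw [hfiltall s] at hlen
      rw [hq0]
      exact List.mem_map.mpr ⟨(b, s), List.mem_filter.mpr ⟨hbs, by simp [hlen]⟩, rfl⟩
    · intro b hb
      rw [hq0] at hb
      rcases List.mem_map.mp hb with ⟨pr, hpr, rfl⟩
      exact List.mem_map.mpr ⟨pr, List.mem_of_mem_filter hpr, rfl⟩
  have hkeyslen : cand.keys.length = cand.items.length := by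
    show (cand.items.map (fun p => p.1)).length = cand.items.length
    exact List.length_map _
  have hmeasure : (cand.keys.filter (fun b => !(PySem.Set.empty : PySem.Set String).contains b)).length *
        (cand.items.length + 1) + q0.length
      < (cand.items.length + 1) * cand.items.length + q0.length + 1 := by
    rw [hfiltall cand.keys, hkeyslen, Nat.mul_comm]
    omega
  obtain ⟨hsound, hclosed⟩ := loopB_SC cand hk hv
    ((cand.items.length + 1) * cand.items.length + q0.length + 1)
    q0 PySem.Set.empty PySem.Set.empty cnt0 hInv hmeasure
  have hiff : ∀ a f, (cand.contains a = true ∧ f ∈ cand.getD a []) ↔ PAp (matchA items) a f := by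
    intro a f
    exact PBp_iff_PAp items a f
  constructor
  · intro hx
    exact deriv_congr hiff (hsound x hx)
  · intro hd
    have hd' := deriv_congr (fun a f => (hiff a f).symm) hd
    refine deriv_mem _ ?_ hd'
    intro a f hP hprem
    exact hclosed a f hP.1 hP.2 (fun g hg hne => hprem g ⟨hP.1, hg⟩ hne)
-- ===== VERDICT (by name: the statement is the Claim_ definition above) =====
theorem without_allergans_spec : Claim_equal_without_allergans := by
  intro items _
  unfold Spec_without_allergans
  unfold without_allergans without_allergans_alt
  dsimp only
  have hmem : ∀ k : String,
      k ∈ (loopA ((matchA items).items.length + 1) (matchA items) PySem.Dict.empty).values ↔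
      k ∈ loopB (candB items) (containingB (candB items))
        (((candB items).items.length + 1) * (candB items).items.length +
          (((candB items).items.filter (fun pr => pr.2.length == 1)).map (fun pr => pr.1)).length + 1)
        (((candB items).items.filter (fun pr => pr.2.length == 1)).map (fun pr => pr.1))
        PySem.Set.empty PySem.Set.empty
        (PySem.Dict.mk ((candB items).items.map (fun pr => (pr.1, (pr.2.length : Int))))) :=
    fun k => (A_values_iff_deriv items k).trans (B_values_iff_deriv items k).symm
  have hcont : ∀ k : String,
      (PySem.Set.ofList (loopA ((matchA items).items.length + 1) (matchA items) PySem.Dict.empty).values).contains k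
      = (loopB (candB items) (containingB (candB items))
        (((candB items).items.length + 1) * (candB items).items.length +
          (((candB items).items.filter (fun pr => pr.2.length == 1)).map (fun pr => pr.1)).length + 1)
        (((candB items).items.filter (fun pr => pr.2.length == 1)).map (fun pr => pr.1))
        PySem.Set.empty PySem.Set.empty
        (PySem.Dict.mk ((candB items).items.map (fun pr => (pr.1, (pr.2.length : Int)))))).contains k := by
    intro k
    have hAB := (PySem.Set.mem_ofList _ k).trans (hmem k)
    simp only [PySem.Set.contains_eq_listContains, List.contains_eq_mem]
    exact decide_eq_decide.mpr hAB
  have hfn : (fun (clean : PySem.Set String) (k : String) =>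
        if (PySem.Set.ofList (loopA ((matchA items).items.length + 1) (matchA items) PySem.Dict.empty).values).contains k
        then clean else PySem.Set.add clean k)
      = (fun (out : PySem.Set String) (k : String) =>
        if (loopB (candB items) (containingB (candB items))
            (((candB items).items.length + 1) * (candB items).items.length +
              (((candB items).items.filter (fun pr => pr.2.length == 1)).map (fun pr => pr.1)).length + 1)
            (((candB items).items.filter (fun pr => pr.2.length == 1)).map (fun pr => pr.1))
            PySem.Set.empty PySem.Set.empty
            (PySem.Dict.mk ((candB items).items.map (fun pr => (pr.1, (pr.2.length : Int)))))).contains k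
        then out else PySem.Set.add out k) := by
    funext c k
    rw [hcont k]
  rw [hfn]
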